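-- pv_equiv track=rewrite | github.com/AileenXie/leetcode | written-examination/00往年真题/tx2018/06.py | func
-- ===== SOURCE A (Python) =====
-- def func(grid,n,m):
--     count = 0
--
--     def draw_y(p,q):
--         while p < n and q < m and (grid[p][q] == "Y" or grid[p][q] == "G"):
--             if grid[p][q] == "Y":
--                 grid[p][q] = "X"  # 逆向画回去
--             if grid[p][q] == "G":
--                 grid[p][q] = "B"  # 逆向画回去
--             p += 1
--             q += 1
--
--     def draw_b(p,q):
--         while p < n and q >= 0 and (grid[p][q] == "B" or grid[p][q] == "G"):
--             if grid[p][q] == "B":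
--                 grid[p][q] = "X"  # 逆向画回去
--             if grid[p][q] == "G":
--                 grid[p][q] = "Y"  # 逆向画回去
--             p += 1
--             q -= 1
--     for i in range(n):
--         for j in range(m):
--             # 遇到Y就向右下方画，直到遇到X或B
--             if grid[i][j]=="Y":
--                 draw_y(i,j)
--                 count += 1
--             # 遇到B就向右下方画，直到遇到X或Y
--             if grid[i][j]=="B":
--                 draw_b(i,j)
--                 count += 1
--             # 遇到G就向右下方画一次，再向左下方画一次
--             if grid[i][j] == "G":
--                 draw_b(i,j)
--                 draw_y(i,j)
--                 count += 2
--     return count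
-- ===== SOURCE B (Python) =====
-- def func(grid, n, m):
--     # Read-only run-start count (same value as A's draw-and-mark scan), then one
--     # pass reproducing A's side effect: every 'Y'/'B'/'G' cell ends up 'X'.
--     count = 0
--     for i in range(n):
--         for j in range(m):
--             v = grid[i][j]
--             if v in ("Y", "G") and (i == 0 or j == 0 or grid[i - 1][j - 1] not in ("Y", "G")):
--                 count += 1
--             if v in ("B", "G") and (i == 0 or j == m - 1 or grid[i - 1][j + 1] not in ("B", "G")):
--                 count += 1
--     for i in range(n):
--         for j in range(m):
--             if grid[i][j] in ("Y", "B", "G"):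
--                 grid[i][j] = "X"
--     return count
-- ===== Notes on version B (the rewrite author's own statement) =====
-- stated objective: simpler
-- what changed: A simulates the drawing: it scans the grid mutating cells along diagonals (draw_y/draw_b while-loops with Y/B/G rewriting) and counts triggered draws; B computes the same count with a read-only pass counting diagonal run starts (a cell starts a ↘ Y/G-run or a ↙ B/G-run iff its diagonal predecessor is absent or not in the run alphabet), plus one plain pass reproducing A's final all-'X' grid state.
import Mathlib
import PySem

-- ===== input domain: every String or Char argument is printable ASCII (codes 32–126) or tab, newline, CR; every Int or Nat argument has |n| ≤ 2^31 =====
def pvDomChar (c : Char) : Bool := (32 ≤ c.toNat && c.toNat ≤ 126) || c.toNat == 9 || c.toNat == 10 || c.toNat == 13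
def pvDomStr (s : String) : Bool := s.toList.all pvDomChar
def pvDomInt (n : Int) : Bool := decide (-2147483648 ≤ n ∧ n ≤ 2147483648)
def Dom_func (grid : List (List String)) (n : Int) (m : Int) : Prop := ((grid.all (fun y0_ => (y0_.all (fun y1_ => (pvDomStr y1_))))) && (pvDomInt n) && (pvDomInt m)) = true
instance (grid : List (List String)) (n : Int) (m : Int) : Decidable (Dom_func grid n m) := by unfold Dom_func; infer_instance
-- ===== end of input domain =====

-- B replaces A's mutating draw-simulation by a read-only count of diagonal run
-- starts (objective: simpler). Both Pythons mutate grid to the same final state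
-- (every 'Y'/'B'/'G' cell becomes 'X'); the Lean ports model the return value only.

-- ===== PORT A =====
-- grid[p][q] (indices are nonnegative and in range wherever the ports read under Pre_;
-- the getD default is only reached outside Pre_)
def cellG (g : List (List String)) (p q : Int) : String :=
  (PySem.List.pyGet? ((PySem.List.pyGet? g p).getD []) q).getD ""
-- grid[p][q] = v (exact for the nonnegative in-range indices at which A assigns)
def setG (g : List (List String)) (p q : Int) (v : String) : List (List String) :=
  g.set p.toNat ((g.getD p.toNat []).set q.toNat v)

-- while-loop draw_y: walk ↘ while the current cell is "Y" or "G", rewriting Y→X, G→B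
def drawY (n m : Int) (g : List (List String)) (p q : Int) : List (List String) :=
  if h : p < n ∧ q < m ∧ (cellG g p q = "Y" ∨ cellG g p q = "G") then
    let g1 := if cellG g p q = "Y" then setG g p q "X" else g
    let g2 := if cellG g1 p q = "G" then setG g1 p q "B" else g1
    drawY n m g2 (p + 1) (q + 1)
  else g
termination_by (n - p).toNat
decreasing_by omega

-- while-loop draw_b: walk ↙ while the current cell is "B" or "G", rewriting B→X, G→Y
def drawB (n m : Int) (g : List (List String)) (p q : Int) : List (List String) :=
  if h : p < n ∧ 0 ≤ q ∧ (cellG g p q = "B" ∨ cellG g p q = "G") then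
    let g1 := if cellG g p q = "B" then setG g p q "X" else g
    let g2 := if cellG g1 p q = "G" then setG g1 p q "Y" else g1
    drawB n m g2 (p + 1) (q - 1)
  else g
termination_by (n - p).toNat
decreasing_by omega

-- the body of A's inner loop at cell (i,j): the three ifs re-read the (mutated) cell
def stepA (n m : Int) (g : List (List String)) (c : Int) (i j : Int) :
    List (List String) × Int :=
  let s1 := if cellG g i j = "Y" then (drawY n m g i j, c + 1) else (g, c)
  let s2 := if cellG s1.1 i j = "B" then (drawB n m s1.1 i j, s1.2 + 1) else s1
  if cellG s2.1 i j = "G" then (drawY n m (drawB n m s2.1 i j) i j, s2.2 + 2) else s2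

def func (grid : List (List String)) (n : Int) (m : Int) : Int :=
  ((PySem.List.pyRange 0 n 1).foldl (fun st i =>
      (PySem.List.pyRange 0 m 1).foldl (fun st j => stepA n m st.1 st.2 i j) st)
    (grid, 0)).2

-- ===== PORT B =====
def func_alt (grid : List (List String)) (n : Int) (m : Int) : Int :=
  (PySem.List.pyRange 0 n 1).foldl (fun count i =>
    (PySem.List.pyRange 0 m 1).foldl (fun count j =>
      let v := cellG grid i j
      let count :=
        if (v = "Y" ∨ v = "G") ∧
            (i = 0 ∨ j = 0 ∨
              ¬(cellG grid (i - 1) (j - 1) = "Y" ∨ cellG grid (i - 1) (j - 1) = "G")) then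
          count + 1 else count
      if (v = "B" ∨ v = "G") ∧
          (i = 0 ∨ j = m - 1 ∨
            ¬(cellG grid (i - 1) (j + 1) = "B" ∨ cellG grid (i - 1) (j + 1) = "G")) then
        count + 1 else count) count) 0

-- ===== PRECONDITION & SPEC =====
-- Pre_ is exactly where A returns: when both loops are nonempty, every scanned row
-- must exist and have at least m cells (otherwise Python A raises IndexError).
def Pre_func (grid : List (List String)) (n : Int) (m : Int) : Prop :=
  0 < n → 0 < m → n ≤ (grid.length : Int) ∧ ∀ r ∈ grid.take n.toNat, m ≤ (r.length : Int)
instance (grid : List (List String)) (n : Int) (m : Int) : Decidable (Pre_func grid n m) := by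
  unfold Pre_func; infer_instance
def pvWitness_func : List (List String) × Int × Int := ([["Y", "B"], ["G", "X"]], 2, 2)
def Spec_func (grid : List (List String)) (n : Int) (m : Int) (out : Int) : Prop := out = func_alt grid n m
instance (grid : List (List String)) (n : Int) (m : Int) (out : Int) : Decidable (Spec_func grid n m out) := by unfold Spec_func; infer_instance

-- ===== CLAIM (what is proved, stated in full; the proofs are below) =====
def Claim_equal_func : Prop := ∀ (grid : List (List String)) (n : Int) (m : Int), Dom_func grid n m → Pre_func grid n m → Spec_func grid n m (func grid n m)

-- ===== LEMMAS AND PROOFS =====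

-- original-grid cell read, Nat indices
def oc (g : List (List String)) (a b : Nat) : String := (g.getD a []).getD b ""

def yg (v : String) : Bool := v == "Y" || v == "G"
def bg (v : String) : Bool := v == "B" || v == "G"

-- topmost cell of the ↘ run of {Y,G} cells through (p,q) in the original grid
def sY (g : List (List String)) (p q : Nat) : Nat × Nat :=
  if p = 0 ∨ q = 0 ∨ yg (oc g (p - 1) (q - 1)) = false then (p, q)
  else sY g (p - 1) (q - 1)
termination_by p
decreasing_by omega

-- topmost cell of the ↙ run of {B,G} cells through (p,q) (runs live in columns < M)
def sB (g : List (List String)) (M p q : Nat) : Nat × Nat :=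
  if p = 0 ∨ q + 1 = M ∨ bg (oc g (p - 1) (q + 1)) = false then (p, q)
  else sB g M (p - 1) (q + 1)
termination_by p
decreasing_by omega

-- length of the ↘ {Y,G} run of grid g starting at (p,q), clipped to N×M
def rlY (g : List (List String)) (N M p q : Nat) : Nat :=
  if p < N ∧ q < M ∧ yg (oc g p q) = true then rlY g N M (p + 1) (q + 1) + 1 else 0
termination_by N - p
decreasing_by omega

-- length of the ↙ {B,G} run of grid g starting at (p,q), clipped to N×M and column 0
def rlB (g : List (List String)) (N M p q : Nat) : Nat :=
  if p < N ∧ q < M ∧ bg (oc g p q) = true then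
    (if q = 0 then 0 else rlB g N M (p + 1) (q - 1)) + 1
  else 0
termination_by N - p
decreasing_by omega

def posc (M : Nat) (c : Nat × Nat) : Nat := c.1 * M + c.2

-- the value A's mutated grid holds at (a,b) just before scanning position s (row-major)
def stv (g : List (List String)) (N M s a b : Nat) : String :=
  if a < N ∧ b < M then
    let v := oc g a b
    if v = "Y" then (if posc M (sY g a b) < s then "X" else "Y")
    else if v = "B" then (if posc M (sB g M a b) < s then "X" else "B")
    else if v = "G" then
      (if posc M (sY g a b) < s then (if posc M (sB g M a b) < s then "X" else "B")
       else (if posc M (sB g M a b) < s then "Y" else "G"))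
    else v
  else oc g a b

-- shape agreement (row count and each row's length)
def shp (g h : List (List String)) : Prop :=
  g.length = h.length ∧ ∀ a, (g.getD a []).length = (h.getD a []).length

-- bounds extracted from Pre_
def gbounds (g : List (List String)) (N M : Nat) : Prop :=
  N ≤ g.length ∧ ∀ a, a < N → M ≤ (g.getD a []).length

-- count contributed by the scan of cell (i,j)
def contrib (g : List (List String)) (M i j : Nat) : Int :=
  (if yg (oc g i j) = true ∧ sY g i j = (i, j) then 1 else 0) +
  (if bg (oc g i j) = true ∧ sB g M i j = (i, j) then 1 else 0)

def bsum (g : List (List String)) (N M : Nat) : Int :=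
  ((List.range N).map (fun i => ((List.range M).map (fun j => contrib g M i j)).sum)).sum

-- ------- small bridges -------
theorem cellG_nat (g : List (List String)) (a b : Nat) : cellG g (a : Int) (b : Int) = oc g a b := by
  simp [cellG, oc, List.getD_eq_getElem?_getD]

theorem yg_iff (v : String) : yg v = true ↔ (v = "Y" ∨ v = "G") := by
  simp [yg]

theorem bg_iff (v : String) : bg v = true ↔ (v = "B" ∨ v = "G") := by
  simp [bg]

theorem posc_inj {M : Nat} {c d : Nat × Nat} (hc : c.2 < M) (hd : d.2 < M)
    (h : posc M c = posc M d) : c = d := by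
  obtain ⟨c1, c2⟩ := c; obtain ⟨d1, d2⟩ := d
  simp only [posc] at h
  have hM : 0 < M := Nat.lt_of_le_of_lt (Nat.zero_le _) hc
  have e1 : (M * c1 + c2) / M = c1 + c2 / M := Nat.mul_add_div hM c1 c2
  have e2 : (M * d1 + d2) / M = d1 + d2 / M := Nat.mul_add_div hM d1 d2
  rw [Nat.mul_comm c1 M] at h
  rw [Nat.mul_comm d1 M] at h
  rw [h, e2, Nat.div_eq_of_lt hd] at e1
  rw [Nat.div_eq_of_lt hc] at e1
  have : c1 = d1 := by omega
  subst this
  have : c2 = d2 := by omega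
  subst this
  rfl

theorem foldl_const {α β : Type} (l : List α) (init : β) :
    l.foldl (fun st _ => st) init = init := by
  induction l with
  | nil => rfl
  | cons x xs ih => simp only [List.foldl_cons]; exact ih

-- ------- sY/sB basics -------
theorem sY_fst_le (g : List (List String)) (p q : Nat) : (sY g p q).1 ≤ p := by
  induction p using Nat.strong_induction_on generalizing q with
  | _ p ih =>
    rw [sY]
    split
    · simp
    · rename_i h
      push Not at h
      exact Nat.le_trans (ih (p - 1) (by omega) (q - 1)) (by omega)

theorem sB_fst_le (g : List (List String)) (M p q : Nat) : (sB g M p q).1 ≤ p := by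
  induction p using Nat.strong_induction_on generalizing q with
  | _ p ih =>
    rw [sB]
    split
    · simp
    · rename_i h
      push Not at h
      exact Nat.le_trans (ih (p - 1) (by omega) (q + 1)) (by omega)

theorem sY_diag (g : List (List String)) (p q : Nat) :
    ∃ k, k ≤ p ∧ k ≤ q ∧ sY g p q = (p - k, q - k) := by
  induction p using Nat.strong_induction_on generalizing q with
  | _ p ih =>
    rw [sY]
    split
    · exact ⟨0, by omega, by omega, by simp⟩
    · rename_i h
      push Not at h
      obtain ⟨k, hk1, hk2, he⟩ := ih (p - 1) (by omega) (q - 1)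
      refine ⟨k + 1, by omega, by omega, ?_⟩
      rw [he]
      have e1 : p - 1 - k = p - (k + 1) := by omega
      have e2 : q - 1 - k = q - (k + 1) := by omega
      rw [e1, e2]

theorem sB_diag (g : List (List String)) (M p q : Nat) (hq : q < M) :
    ∃ k, k ≤ p ∧ q + k < M ∧ sB g M p q = (p - k, q + k) := by
  induction p using Nat.strong_induction_on generalizing q with
  | _ p ih =>
    rw [sB]
    split
    · exact ⟨0, by omega, by omega, by simp⟩
    · rename_i h
      push Not at h
      obtain ⟨k, hk1, hk2, he⟩ := ih (p - 1) (by omega) (q + 1) (by omega)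
      refine ⟨k + 1, by omega, by omega, ?_⟩
      rw [he]
      have e1 : p - 1 - k = p - (k + 1) := by omega
      have e2 : q + 1 + k = q + (k + 1) := by omega
      rw [e1, e2]

theorem posc_sY_le (g : List (List String)) (M p q : Nat) :
    posc M (sY g p q) ≤ posc M (p, q) ∧ (sY g p q ≠ (p, q) → posc M (sY g p q) < posc M (p, q)) := by
  induction p using Nat.strong_induction_on generalizing q with
  | _ p ih =>
    rw [sY]
    split
    · exact ⟨Nat.le_refl _, fun h => absurd rfl h⟩
    · rename_i h
      push Not at h
      have := (ih (p - 1) (by omega) (q - 1)).1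
      constructor
      · refine Nat.le_trans this ?_
        simp only [posc]
        rw [Nat.sub_one_mul]
        have hpM : M ≤ p * M := by
          calc M = 1 * M := by omega
          _ ≤ p * M := Nat.mul_le_mul_right M (by omega)
        omega
      · intro _
        refine Nat.lt_of_le_of_lt this ?_
        simp only [posc]
        rw [Nat.sub_one_mul]
        have hpM : M ≤ p * M := by
          calc M = 1 * M := by omega
          _ ≤ p * M := Nat.mul_le_mul_right M (by omega)
        omega

theorem posc_sB_le (g : List (List String)) (M p q : Nat) (hq : q < M) :
    posc M (sB g M p q) ≤ posc M (p, q) ∧ (sB g M p q ≠ (p, q) → posc M (sB g M p q) < posc M (p, q)) := by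
  induction p using Nat.strong_induction_on generalizing q with
  | _ p ih =>
    rw [sB]
    split
    · exact ⟨Nat.le_refl _, fun h => absurd rfl h⟩
    · rename_i h
      push Not at h
      have := (ih (p - 1) (by omega) (q + 1) (by omega)).1
      have key : posc M (p - 1, q + 1) < posc M (p, q) := by
        simp only [posc]
        rw [Nat.sub_one_mul]
        have hpM : M ≤ p * M := by
          calc M = 1 * M := by omega
          _ ≤ p * M := Nat.mul_le_mul_right M (by omega)
        omega
      exact ⟨Nat.le_of_lt (Nat.lt_of_le_of_lt this key), fun _ => Nat.lt_of_le_of_lt this key⟩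

theorem sY_start (g : List (List String)) (p q : Nat) :
    (sY g p q).1 = 0 ∨ (sY g p q).2 = 0 ∨ yg (oc g ((sY g p q).1 - 1) ((sY g p q).2 - 1)) = false := by
  induction p using Nat.strong_induction_on generalizing q with
  | _ p ih =>
    rw [sY]
    split
    · simpa using by assumption
    · rename_i h
      push Not at h
      exact ih (p - 1) (by omega) (q - 1)

theorem sB_start (g : List (List String)) (M p q : Nat) :
    (sB g M p q).1 = 0 ∨ (sB g M p q).2 + 1 = M ∨ bg (oc g ((sB g M p q).1 - 1) ((sB g M p q).2 + 1)) = false := by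
  induction p using Nat.strong_induction_on generalizing q with
  | _ p ih =>
    rw [sB]
    split
    · simpa using by assumption
    · rename_i h
      push Not at h
      exact ih (p - 1) (by omega) (q + 1)

theorem sY_eq_self_iff (g : List (List String)) (p q : Nat) :
    sY g p q = (p, q) ↔ (p = 0 ∨ q = 0 ∨ yg (oc g (p - 1) (q - 1)) = false) := by
  constructor
  · intro h
    by_contra hc
    rw [sY] at h
    rw [if_neg hc] at h
    have := sY_fst_le g (p - 1) (q - 1)
    push Not at hc
    rw [h] at this
    simp at this
    omega
  · intro h
    rw [sY, if_pos h]

theorem sB_eq_self_iff (g : List (List String)) (M p q : Nat) :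
    sB g M p q = (p, q) ↔ (p = 0 ∨ q + 1 = M ∨ bg (oc g (p - 1) (q + 1)) = false) := by
  constructor
  · intro h
    by_contra hc
    rw [sB] at h
    rw [if_neg hc] at h
    have := sB_fst_le g M (p - 1) (q + 1)
    push Not at hc
    rw [h] at this
    simp at this
    omega
  · intro h
    rw [sB, if_pos h]

theorem sY_chain (g : List (List String)) (p q : Nat) (h : yg (oc g p q) = true) :
    sY g (p + 1) (q + 1) = sY g p q := by
  rw [sY]
  rw [if_neg (by simp [h])]
  simp

theorem sB_chain (g : List (List String)) (M p q : Nat) (hq1 : 1 ≤ q) (hqM : q ≠ M)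
    (h : bg (oc g p q) = true) :
    sB g M (p + 1) (q - 1) = sB g M p q := by
  rw [sB]
  have e : q - 1 + 1 = q := by omega
  rw [if_neg (by simp [e, h, hqM])]
  simp [e]

theorem rlY_mem (g : List (List String)) (N M : Nat) :
    ∀ t p q, t < rlY g N M p q → p + t < N ∧ q + t < M ∧ yg (oc g (p + t) (q + t)) = true := by
  intro t
  induction t with
  | zero =>
    intro p q ht
    rw [rlY] at ht
    by_cases h : p < N ∧ q < M ∧ yg (oc g p q) = true
    · simpa using h
    · rw [if_neg h] at ht; omega
  | succ t ih =>
    intro p q ht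
    rw [rlY] at ht
    by_cases h : p < N ∧ q < M ∧ yg (oc g p q) = true
    · rw [if_pos h] at ht
      have := ih (p + 1) (q + 1) (by omega)
      constructor
      · omega
      constructor
      · omega
      · have e1 : p + (t + 1) = p + 1 + t := by omega
        have e2 : q + (t + 1) = q + 1 + t := by omega
        rw [e1, e2]; exact this.2.2
    · rw [if_neg h] at ht; omega

theorem rlY_stop (g : List (List String)) (N M : Nat) :
    ∀ K p q, rlY g N M p q = K →
      ¬(p + K < N ∧ q + K < M ∧ yg (oc g (p + K) (q + K)) = true) := by
  intro K
  induction K with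
  | zero =>
    intro p q hK
    rw [rlY] at hK
    by_cases h : p < N ∧ q < M ∧ yg (oc g p q) = true
    · rw [if_pos h] at hK; omega
    · simpa using h
  | succ K ih =>
    intro p q hK
    rw [rlY] at hK
    by_cases h : p < N ∧ q < M ∧ yg (oc g p q) = true
    · rw [if_pos h] at hK
      have := ih (p + 1) (q + 1) (by omega)
      have e1 : p + (K + 1) = p + 1 + K := by omega
      have e2 : q + (K + 1) = q + 1 + K := by omega
      rw [e1, e2]; exact this
    · rw [if_neg h] at hK; omega

theorem rlB_mem (g : List (List String)) (N M : Nat) :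
    ∀ t p q, t < rlB g N M p q → t ≤ q ∧ p + t < N ∧ q - t < M ∧ bg (oc g (p + t) (q - t)) = true := by
  intro t
  induction t with
  | zero =>
    intro p q ht
    rw [rlB] at ht
    by_cases h : p < N ∧ q < M ∧ bg (oc g p q) = true
    · simpa using ⟨h.1, h.2.1, h.2.2⟩
    · rw [if_neg h] at ht; omega
  | succ t ih =>
    intro p q ht
    rw [rlB] at ht
    by_cases h : p < N ∧ q < M ∧ bg (oc g p q) = true
    · rw [if_pos h] at ht
      by_cases hq : q = 0
      · rw [if_pos hq] at ht; omega
      · rw [if_neg hq] at ht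
        have := ih (p + 1) (q - 1) (by omega)
        refine ⟨by omega, by omega, by omega, ?_⟩
        have e1 : p + (t + 1) = p + 1 + t := by omega
        have e2 : q - (t + 1) = q - 1 - t := by omega
        rw [e1, e2]; exact this.2.2.2
    · rw [if_neg h] at ht; omega

theorem rlB_stop (g : List (List String)) (N M : Nat) :
    ∀ K p q, rlB g N M p q = K →
      K = q + 1 ∨ ¬(p + K < N ∧ q - K < M ∧ bg (oc g (p + K) (q - K)) = true) := by
  intro K
  induction K with
  | zero =>
    intro p q hK
    rw [rlB] at hK
    by_cases h : p < N ∧ q < M ∧ bg (oc g p q) = true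
    · rw [if_pos h] at hK; omega
    · right; simpa using h
  | succ K ih =>
    intro p q hK
    rw [rlB] at hK
    by_cases h : p < N ∧ q < M ∧ bg (oc g p q) = true
    · rw [if_pos h] at hK
      by_cases hq : q = 0
      · rw [if_pos hq] at hK
        left; omega
      · rw [if_neg hq] at hK
        rcases ih (p + 1) (q - 1) (by omega) with h1 | h1
        · left; omega
        · right
          have e1 : p + (K + 1) = p + 1 + K := by omega
          have e2 : q - (K + 1) = q - 1 - K := by omega
          rw [e1, e2]; exact h1
    · rw [if_neg h] at hK; omega

theorem rlY_eq_of (g : List (List String)) (N M : Nat) :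
    ∀ L p q, (∀ t, t < L → p + t < N ∧ q + t < M ∧ yg (oc g (p + t) (q + t)) = true) →
      ¬(p + L < N ∧ q + L < M ∧ yg (oc g (p + L) (q + L)) = true) →
      rlY g N M p q = L := by
  intro L
  induction L with
  | zero =>
    intro p q _ hstop
    rw [rlY]
    rw [if_neg (by simpa using hstop)]
  | succ L ih =>
    intro p q hmem hstop
    rw [rlY]
    rw [if_pos (by simpa using hmem 0 (by omega))]
    rw [ih (p + 1) (q + 1)
      (fun t ht => by
        have := hmem (t + 1) (by omega)
        refine ⟨by omega, by omega, ?_⟩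
        have e1 : p + 1 + t = p + (t + 1) := by omega
        have e2 : q + 1 + t = q + (t + 1) := by omega
        rw [e1, e2]; exact this.2.2)
      (by
        have e1 : p + 1 + L = p + (L + 1) := by omega
        have e2 : q + 1 + L = q + (L + 1) := by omega
        rw [e1, e2]; exact hstop)]

theorem rlB_eq_of (g : List (List String)) (N M : Nat) :
    ∀ L p q, (∀ t, t < L → t ≤ q ∧ p + t < N ∧ q - t < M ∧ bg (oc g (p + t) (q - t)) = true) →
      (L = q + 1 ∨ ¬(p + L < N ∧ q - L < M ∧ bg (oc g (p + L) (q - L)) = true)) →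
      rlB g N M p q = L := by
  intro L
  induction L with
  | zero =>
    intro p q _ hstop
    rw [rlB]
    rcases hstop with h | h
    · omega
    · rw [if_neg (by simpa using h)]
  | succ L ih =>
    intro p q hmem hstop
    have h0 := hmem 0 (by omega)
    rw [rlB]
    rw [if_pos (by simpa using ⟨h0.2.1, h0.2.2.1, h0.2.2.2⟩)]
    by_cases hq : q = 0
    · rw [if_pos hq]
      -- all t < L+1 have t ≤ q = 0, so L = 0
      by_cases hL : L = 0
      · omega
      · exfalso
        have := hmem 1 (by omega)
        omega
    · rw [if_neg hq]
      rw [ih (p + 1) (q - 1)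
        (fun t ht => by
          have := hmem (t + 1) (by omega)
          refine ⟨by omega, by omega, by omega, ?_⟩
          have e1 : p + 1 + t = p + (t + 1) := by omega
          have e2 : q - 1 - t = q - (t + 1) := by omega
          rw [e1, e2]; exact this.2.2.2)
        (by
          rcases hstop with h | h
          · left; omega
          · right
            have e1 : p + 1 + L = p + (L + 1) := by omega
            have e2 : q - 1 - L = q - (L + 1) := by omega
            rw [e1, e2]; exact h)]

theorem sY_run (g : List (List String)) (N M p q : Nat) (hs : sY g p q = (p, q)) :
    ∀ t, t < rlY g N M p q → sY g (p + t) (q + t) = (p, q) := by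
  intro t
  induction t with
  | zero => intro _; simpa using hs
  | succ t ih =>
    intro ht
    have hyg := (rlY_mem g N M t p q (by omega)).2.2
    have e1 : p + (t + 1) = p + t + 1 := by omega
    have e2 : q + (t + 1) = q + t + 1 := by omega
    rw [e1, e2, sY_chain g _ _ hyg]
    exact ih (by omega)

theorem sB_run (g : List (List String)) (N M p q : Nat) (_hq : q < M) (hs : sB g M p q = (p, q)) :
    ∀ t, t < rlB g N M p q → sB g M (p + t) (q - t) = (p, q) := by
  intro t
  induction t with
  | zero => intro _; simpa using hs
  | succ t ih =>
    intro ht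
    have hm := rlB_mem g N M t p q (by omega)
    have hm1 := rlB_mem g N M (t + 1) p q ht
    have e1 : p + (t + 1) = p + t + 1 := by omega
    have e2 : q - (t + 1) = q - t - 1 := by omega
    rw [e1, e2, sB_chain g M _ _ (by omega) (by omega) hm.2.2.2]
    exact ih (by omega)

theorem sY_mem_run (g : List (List String)) (N M : Nat) :
    ∀ a i j b, a < N → b < M → yg (oc g a b) = true → sY g a b = (i, j) →
      ∃ t, t < rlY g N M i j ∧ a = i + t ∧ b = j + t := by
  intro a
  induction a using Nat.strong_induction_on with
  | _ a ih =>
    intro i j b ha hb hyg hs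
    by_cases hc : a = 0 ∨ b = 0 ∨ yg (oc g (a - 1) (b - 1)) = false
    · have : (a, b) = (i, j) := by rw [← hs, sY, if_pos hc]
      have hij : i = a ∧ j = b := by
        simp at this; omega
      refine ⟨0, ?_, by omega, by omega⟩
      rw [rlY, if_pos (by refine ⟨by omega, by omega, ?_⟩; rw [hij.1, hij.2]; exact hyg)]
      omega
    · push Not at hc
      have hrec : sY g (a - 1) (b - 1) = (i, j) := by
        rw [← hs]
        conv_rhs => rw [sY]
        rw [if_neg (by push Not; exact hc)]
      have hyg' : yg (oc g (a - 1) (b - 1)) = true := Bool.ne_false_iff.mp hc.2.2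
      obtain ⟨t, ht, he1, he2⟩ := ih (a - 1) (by omega) i j (b - 1) (by omega) (by omega) hyg' hrec
      refine ⟨t + 1, ?_, by omega, by omega⟩
      -- rlY i j > t and cell at t+1 = (a,b) is a valid run cell, so rlY > t+1
      by_contra hlt
      have hKeq : rlY g N M i j = t + 1 := by omega
      have := rlY_stop g N M (t + 1) i j hKeq
      exact this ⟨by omega, by omega, by
        have e1 : i + (t + 1) = a := by omega
        have e2 : j + (t + 1) = b := by omega
        rw [e1, e2]; exact hyg⟩

theorem sB_mem_run (g : List (List String)) (N M : Nat) :
    ∀ a i j b, a < N → b < M → bg (oc g a b) = true → sB g M a b = (i, j) →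
      ∃ t, t < rlB g N M i j ∧ t ≤ j ∧ a = i + t ∧ b = j - t := by
  intro a
  induction a using Nat.strong_induction_on with
  | _ a ih =>
    intro i j b ha hb hbg hs
    by_cases hc : a = 0 ∨ b + 1 = M ∨ bg (oc g (a - 1) (b + 1)) = false
    · have : (a, b) = (i, j) := by rw [← hs, sB, if_pos hc]
      have hij : i = a ∧ j = b := by simp at this; omega
      refine ⟨0, ?_, by omega, by omega, by omega⟩
      rw [rlB, if_pos (by refine ⟨by omega, by omega, ?_⟩; rw [hij.1, hij.2]; exact hbg)]
      omega
    · push Not at hc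
      have hrec : sB g M (a - 1) (b + 1) = (i, j) := by
        rw [← hs]
        conv_rhs => rw [sB]
        rw [if_neg (by push Not; exact hc)]
      have hbg' : bg (oc g (a - 1) (b + 1)) = true := Bool.ne_false_iff.mp hc.2.2
      obtain ⟨t, ht, htj, he1, he2⟩ := ih (a - 1) (by omega) i j (b + 1) (by omega) (by omega) hbg' hrec
      refine ⟨t + 1, ?_, by omega, by omega, by omega⟩
      by_contra hlt
      have hKeq : rlB g N M i j = t + 1 := by omega
      rcases rlB_stop g N M (t + 1) i j hKeq with h | h
      · omega
      · exact h ⟨by omega, by omega, by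
          have e1 : i + (t + 1) = a := by omega
          have e2 : j - (t + 1) = b := by omega
          rw [e1, e2]; exact hbg⟩

theorem sY_chain_yg (g : List (List String)) (a b : Nat) (hyg : yg (oc g a b) = true) :
    yg (oc g (sY g a b).1 (sY g a b).2) = true := by
  induction a using Nat.strong_induction_on generalizing b with
  | _ a ih =>
    rw [sY]
    split
    · simpa using hyg
    · rename_i h
      push Not at h
      exact ih (a - 1) (by omega) (b - 1) (Bool.ne_false_iff.mp h.2.2)

theorem sB_chain_bg (g : List (List String)) (M a b : Nat) (hbg : bg (oc g a b) = true) :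
    bg (oc g (sB g M a b).1 (sB g M a b).2) = true := by
  induction a using Nat.strong_induction_on generalizing b with
  | _ a ih =>
    rw [sB]
    split
    · simpa using hbg
    · rename_i h
      push Not at h
      exact ih (a - 1) (by omega) (b + 1) (Bool.ne_false_iff.mp h.2.2)

-- if some cell's ↘ start is (i,j) then (i,j) itself is a yg start (and dually)
theorem sY_target (g : List (List String)) (i j a b : Nat)
    (hyg : yg (oc g a b) = true) (hs : sY g a b = (i, j)) :
    yg (oc g i j) = true ∧ sY g i j = (i, j) := by
  have h1 := sY_chain_yg g a b hyg
  rw [hs] at h1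
  have h2 := sY_start g a b
  rw [hs] at h2
  exact ⟨h1, (sY_eq_self_iff g i j).2 h2⟩

theorem sB_target (g : List (List String)) (M i j a b : Nat)
    (hbg : bg (oc g a b) = true) (hs : sB g M a b = (i, j)) :
    bg (oc g i j) = true ∧ sB g M i j = (i, j) := by
  have h1 := sB_chain_bg g M a b hbg
  rw [hs] at h1
  have h2 := sB_start g M a b
  rw [hs] at h2
  exact ⟨h1, (sB_eq_self_iff g M i j).2 h2⟩

-- ------- setG / oc -------
theorem shp_refl (g : List (List String)) : shp g g := ⟨rfl, fun _ => rfl⟩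
theorem shp_trans {g h k : List (List String)} (h1 : shp g h) (h2 : shp h k) : shp g k :=
  ⟨h1.1.trans h2.1, fun a => (h1.2 a).trans (h2.2 a)⟩
theorem gbounds_of_shp {g gst : List (List String)} {N M : Nat}
    (hs : shp gst g) (hb : gbounds g N M) : gbounds gst N M := by
  refine ⟨hs.1 ▸ hb.1, fun a ha => ?_⟩
  rw [hs.2 a]
  exact hb.2 a ha

theorem setG_nat (g : List (List String)) (a b : Nat) (v : String) :
    setG g (a : Int) (b : Int) v = g.set a ((g.getD a []).set b v) := by
  simp [setG]

theorem shp_setG (g : List (List String)) (a b : Nat) (v : String) :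
    shp (setG g (a : Int) (b : Int) v) g := by
  rw [setG_nat]
  refine ⟨by simp, fun x => ?_⟩
  simp only [List.getD_eq_getElem?_getD, List.getElem?_set]
  by_cases hx : a = x
  · subst hx
    by_cases hlen : a < g.length
    · simp [hlen]
    · simp [hlen]
  · simp [hx]

theorem oc_setG (g : List (List String)) (a b : Nat) (v : String)
    (ha : a < g.length) (hb : b < (g.getD a []).length) (x y : Nat) :
    oc (setG g (a : Int) (b : Int) v) x y = if x = a ∧ y = b then v else oc g x y := by
  rw [setG_nat]
  simp only [oc, List.getD_eq_getElem?_getD, List.getElem?_set]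
  by_cases hx : a = x
  · subst hx
    simp only [if_pos ha]
    rw [List.getD_eq_getElem?_getD] at hb
    by_cases hy : y = b
    · subst hy
      have hbl : y < ((g[a]?).getD []).length := hb
      simp [hbl]
    · simp [Ne.symm hy, hy]
  · rw [if_neg hx]
    rw [if_neg (by intro hc; exact hx hc.1.symm)]

-- ------- draw characterizations -------
def mY (v : String) : String := if v = "Y" then "X" else if v = "G" then "B" else v
def mB (v : String) : String := if v = "B" then "X" else if v = "G" then "Y" else v

theorem guardY (g : List (List String)) (N M p q : Nat) :
    ((p : Int) < (N : Int) ∧ (q : Int) < (M : Int) ∧ (cellG g (p : Int) (q : Int) = "Y" ∨ cellG g (p : Int) (q : Int) = "G"))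
      ↔ (p < N ∧ q < M ∧ yg (oc g p q) = true) := by
  rw [cellG_nat, yg_iff]
  constructor
  · rintro ⟨h1, h2, h3⟩; exact ⟨by exact_mod_cast h1, by exact_mod_cast h2, h3⟩
  · rintro ⟨h1, h2, h3⟩; exact ⟨by exact_mod_cast h1, by exact_mod_cast h2, h3⟩

theorem guardB (g : List (List String)) (N _M p q : Nat) :
    ((p : Int) < (N : Int) ∧ (0 : Int) ≤ (q : Int) ∧ (cellG g (p : Int) (q : Int) = "B" ∨ cellG g (p : Int) (q : Int) = "G"))
      ↔ (p < N ∧ bg (oc g p q) = true) := by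
  rw [cellG_nat, bg_iff]
  constructor
  · rintro ⟨h1, _, h3⟩; exact ⟨by exact_mod_cast h1, h3⟩
  · rintro ⟨h1, h3⟩; exact ⟨by exact_mod_cast h1, by positivity, h3⟩

theorem drawY_spec (N M : Nat) : ∀ (K : Nat) (g : List (List String)) (p q : Nat),
    gbounds g N M → rlY g N M p q = K →
    shp (drawY (N : Int) (M : Int) g (p : Int) (q : Int)) g ∧
    ∀ a b : Nat, oc (drawY (N : Int) (M : Int) g (p : Int) (q : Int)) a b =
      if p ≤ a ∧ q ≤ b ∧ a - p = b - q ∧ a - p < K then mY (oc g a b) else oc g a b := by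
  intro K
  induction K with
  | zero =>
    intro g p q hb hK
    have hcond : ¬(p < N ∧ q < M ∧ yg (oc g p q) = true) := by
      intro h
      rw [rlY, if_pos h] at hK
      omega
    rw [drawY, dif_neg (fun hg => hcond ((guardY g N M p q).mp hg))]
    exact ⟨shp_refl g, fun a b => by rw [if_neg (by omega)]⟩
  | succ K ih =>
    intro g p q hb hK
    by_cases hcond : p < N ∧ q < M ∧ yg (oc g p q) = true
    case neg =>
      rw [rlY, if_neg hcond] at hK
      omega
    have hpl : p < g.length := Nat.lt_of_lt_of_le hcond.1 hb.1
    have hql : q < (g.getD p []).length := Nat.lt_of_lt_of_le hcond.2.1 (hb.2 p hcond.1)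
    have hKrec : rlY g N M (p + 1) (q + 1) = K := by
      rw [rlY, if_pos hcond] at hK
      omega
    rw [drawY, dif_pos ((guardY g N M p q).mpr hcond)]
    have hg2 : (if cellG (if cellG g (p : Int) (q : Int) = "Y" then setG g (p : Int) (q : Int) "X" else g) (p : Int) (q : Int) = "G"
          then setG (if cellG g (p : Int) (q : Int) = "Y" then setG g (p : Int) (q : Int) "X" else g) (p : Int) (q : Int) "B"
          else (if cellG g (p : Int) (q : Int) = "Y" then setG g (p : Int) (q : Int) "X" else g))
        = setG g (p : Int) (q : Int) (mY (oc g p q)) := by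
      simp only [cellG_nat]
      by_cases hY : oc g p q = "Y"
      · rw [show (if oc g p q = "Y" then setG g (p : Int) (q : Int) "X" else g) = setG g (p : Int) (q : Int) "X" from if_pos hY]
        rw [oc_setG g p q "X" hpl hql p q]
        rw [show ((if p = p ∧ q = q then "X" else oc g p q) : String) = "X" from if_pos ⟨rfl, rfl⟩]
        rw [if_neg (by decide : ¬("X" : String) = "G")]
        rw [hY]
        simp [mY]
      · have hG : oc g p q = "G" := by
          have := hcond.2.2; rw [yg_iff] at this; tauto
        rw [show (if oc g p q = "Y" then setG g (p : Int) (q : Int) "X" else g) = g from if_neg hY]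
        rw [if_pos hG, hG]
        simp [mY]
    simp only [hg2]
    set g2 := setG g (p : Int) (q : Int) (mY (oc g p q)) with hg2def
    have hshp2 : shp g2 g := shp_setG g p q _
    have hoc2 : ∀ x y, oc g2 x y = if x = p ∧ y = q then mY (oc g p q) else oc g x y :=
      fun x y => oc_setG g p q _ hpl hql x y
    have hb2 : gbounds g2 N M := gbounds_of_shp hshp2 hb
    have hK2 : rlY g2 N M (p + 1) (q + 1) = K := by
      refine rlY_eq_of g2 N M K (p + 1) (q + 1) ?_ ?_
      · intro t ht
        have := rlY_mem g N M (t + 1) p q (by omega)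
        refine ⟨by omega, by omega, ?_⟩
        rw [hoc2, if_neg (by omega)]
        have e1 : p + 1 + t = p + (t + 1) := by omega
        have e2 : q + 1 + t = q + (t + 1) := by omega
        rw [e1, e2]; exact this.2.2
      · have hst := rlY_stop g N M (K + 1) p q hK
        intro hcc
        refine hst ⟨by omega, by omega, ?_⟩
        have hval := hcc.2.2
        rw [hoc2, if_neg (by omega)] at hval
        have e1 : p + (K + 1) = p + 1 + K := by omega
        have e2 : q + (K + 1) = q + 1 + K := by omega
        rw [e1, e2]; exact hval
    have cp : ((p : Int) + 1) = ((p + 1 : Nat) : Int) := by push_cast; ring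
    have cq : ((q : Int) + 1) = ((q + 1 : Nat) : Int) := by push_cast; ring
    rw [cp, cq]
    obtain ⟨ihshp, ihoc⟩ := ih g2 (p + 1) (q + 1) hb2 hK2
    refine ⟨shp_trans ihshp hshp2, fun a b => ?_⟩
    rw [ihoc a b]
    by_cases hab : a = p ∧ b = q
    · obtain ⟨rfl, rfl⟩ := hab
      rw [if_neg (by omega), hoc2, if_pos ⟨rfl, rfl⟩, if_pos (by omega)]
    · rw [hoc2, if_neg hab]
      by_cases h1 : p + 1 ≤ a ∧ q + 1 ≤ b ∧ a - (p + 1) = b - (q + 1) ∧ a - (p + 1) < K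
      · rw [if_pos h1, if_pos (by omega)]
      · rw [if_neg h1, if_neg (by omega)]

theorem drawB_spec (N M : Nat) : ∀ (K : Nat) (g : List (List String)) (p q : Nat),
    q < M → gbounds g N M → rlB g N M p q = K →
    shp (drawB (N : Int) (M : Int) g (p : Int) (q : Int)) g ∧
    ∀ a b : Nat, oc (drawB (N : Int) (M : Int) g (p : Int) (q : Int)) a b =
      if p ≤ a ∧ b ≤ q ∧ a - p = q - b ∧ a - p < K then mB (oc g a b) else oc g a b := by
  intro K
  induction K with
  | zero =>
    intro g p q hq hb hK
    have hcond : ¬(p < N ∧ bg (oc g p q) = true) := by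
      intro h
      rw [rlB, if_pos ⟨h.1, hq, h.2⟩] at hK
      omega
    rw [drawB, dif_neg (fun hg => hcond ((guardB g N M p q).mp hg))]
    exact ⟨shp_refl g, fun a b => by rw [if_neg (by omega)]⟩
  | succ K ih =>
    intro g p q hq hb hK
    by_cases hcond : p < N ∧ bg (oc g p q) = true
    case neg =>
      rw [rlB] at hK
      by_cases hc2 : p < N ∧ q < M ∧ bg (oc g p q) = true
      · exact absurd ⟨hc2.1, hc2.2.2⟩ hcond
      · rw [if_neg hc2] at hK; omega
    have hpl : p < g.length := Nat.lt_of_lt_of_le hcond.1 hb.1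
    have hql : q < (g.getD p []).length := Nat.lt_of_lt_of_le hq (hb.2 p hcond.1)
    rw [drawB, dif_pos ((guardB g N M p q).mpr hcond)]
    have hg2 : (if cellG (if cellG g (p : Int) (q : Int) = "B" then setG g (p : Int) (q : Int) "X" else g) (p : Int) (q : Int) = "G"
          then setG (if cellG g (p : Int) (q : Int) = "B" then setG g (p : Int) (q : Int) "X" else g) (p : Int) (q : Int) "Y"
          else (if cellG g (p : Int) (q : Int) = "B" then setG g (p : Int) (q : Int) "X" else g))
        = setG g (p : Int) (q : Int) (mB (oc g p q)) := by
      simp only [cellG_nat]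
      by_cases hB : oc g p q = "B"
      · rw [show (if oc g p q = "B" then setG g (p : Int) (q : Int) "X" else g) = setG g (p : Int) (q : Int) "X" from if_pos hB]
        rw [oc_setG g p q "X" hpl hql p q]
        rw [show ((if p = p ∧ q = q then "X" else oc g p q) : String) = "X" from if_pos ⟨rfl, rfl⟩]
        rw [if_neg (by decide : ¬("X" : String) = "G")]
        rw [hB]
        simp [mB]
      · have hG : oc g p q = "G" := by
          have := hcond.2; rw [bg_iff] at this; tauto
        rw [show (if oc g p q = "B" then setG g (p : Int) (q : Int) "X" else g) = g from if_neg hB]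
        rw [if_pos hG, hG]
        simp [mB]
    simp only [hg2]
    set g2 := setG g (p : Int) (q : Int) (mB (oc g p q)) with hg2def
    have hshp2 : shp g2 g := shp_setG g p q _
    have hoc2 : ∀ x y, oc g2 x y = if x = p ∧ y = q then mB (oc g p q) else oc g x y :=
      fun x y => oc_setG g p q _ hpl hql x y
    have hb2 : gbounds g2 N M := gbounds_of_shp hshp2 hb
    by_cases hq0 : q = 0
    · -- the run ends at column 0: the recursive call immediately returns
      subst hq0
      have hK0 : K = 0 := by
        rw [rlB, if_pos ⟨hcond.1, hq, hcond.2⟩, if_pos rfl] at hK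
        omega
      subst hK0
      rw [drawB, dif_neg (by rintro ⟨-, h2, -⟩; omega)]
      refine ⟨hshp2, fun a b => ?_⟩
      rw [hoc2 a b]
      by_cases hab : a = p ∧ b = 0
      · obtain ⟨rfl, rfl⟩ := hab
        rw [if_pos ⟨rfl, rfl⟩, if_pos (by omega)]
      · rw [if_neg hab, if_neg (by omega)]
    · have hKrec : rlB g N M (p + 1) (q - 1) = K := by
        rw [rlB, if_pos ⟨hcond.1, hq, hcond.2⟩, if_neg hq0] at hK
        omega
      have hK2 : rlB g2 N M (p + 1) (q - 1) = K := by
        refine rlB_eq_of g2 N M K (p + 1) (q - 1) ?_ ?_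
        · intro t ht
          have := rlB_mem g N M (t + 1) p q (by omega)
          refine ⟨by omega, by omega, by omega, ?_⟩
          rw [hoc2, if_neg (by omega)]
          have e1 : p + 1 + t = p + (t + 1) := by omega
          have e2 : q - 1 - t = q - (t + 1) := by omega
          rw [e1, e2]; exact this.2.2.2
        · rcases rlB_stop g N M (K + 1) p q hK with h | h
          · left; omega
          · right
            intro hcc
            refine h ⟨by omega, by omega, ?_⟩
            have hval := hcc.2.2
            rw [hoc2, if_neg (by omega)] at hval
            have e1 : p + (K + 1) = p + 1 + K := by omega
            have e2 : q - (K + 1) = q - 1 - K := by omega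
            rw [e1, e2]; exact hval
      have cp : ((p : Int) + 1) = ((p + 1 : Nat) : Int) := by push_cast; ring
      have cq : ((q : Int) - 1) = ((q - 1 : Nat) : Int) := by
        have : 1 ≤ q := by omega
        push_cast [this]; ring
      rw [cp, cq]
      obtain ⟨ihshp, ihoc⟩ := ih g2 (p + 1) (q - 1) (by omega) hb2 hK2
      refine ⟨shp_trans ihshp hshp2, fun a b => ?_⟩
      rw [ihoc a b]
      by_cases hab : a = p ∧ b = q
      · obtain ⟨rfl, rfl⟩ := hab
        rw [if_neg (by omega), hoc2, if_pos ⟨rfl, rfl⟩, if_pos (by omega)]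
      · rw [hoc2, if_neg hab]
        by_cases h1 : p + 1 ≤ a ∧ b ≤ q - 1 ∧ a - (p + 1) = q - 1 - b ∧ a - (p + 1) < K
        · rw [if_pos h1, if_pos (by omega)]
        · rw [if_neg h1, if_neg (by omega)]

-- ------- stv step facts -------
theorem stv_zero (g : List (List String)) (N M a b : Nat) : stv g N M 0 a b = oc g a b := by
  simp only [stv]
  split
  · split_ifs <;> simp_all
  · rfl

theorem stv_eval_Y (g : List (List String)) (N M s a b : Nat) (ha : a < N) (hb : b < M)
    (h : oc g a b = "Y") :
    stv g N M s a b = if posc M (sY g a b) < s then "X" else "Y" := by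
  simp [stv, ha, hb, h]

theorem stv_eval_B (g : List (List String)) (N M s a b : Nat) (ha : a < N) (hb : b < M)
    (h : oc g a b = "B") :
    stv g N M s a b = if posc M (sB g M a b) < s then "X" else "B" := by
  simp [stv, ha, hb, h]

theorem stv_eval_G (g : List (List String)) (N M s a b : Nat) (ha : a < N) (hb : b < M)
    (h : oc g a b = "G") :
    stv g N M s a b =
      if posc M (sY g a b) < s then (if posc M (sB g M a b) < s then "X" else "B")
      else (if posc M (sB g M a b) < s then "Y" else "G") := by
  simp [stv, ha, hb, h]

theorem stv_eval_other (g : List (List String)) (N M s a b : Nat)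
    (hY : ¬ oc g a b = "Y") (hB : ¬ oc g a b = "B") (hG : ¬ oc g a b = "G") :
    stv g N M s a b = oc g a b := by
  simp only [stv]
  split
  · rfl
  · rfl

-- a cell whose original value is not in {Y,G} never shows a yg value, and dually
theorem stv_not_yg (g : List (List String)) (N M s a b : Nat)
    (h : yg (oc g a b) = false) : yg (stv g N M s a b) = false := by
  by_cases hreg : a < N ∧ b < M
  · have hY : ¬ oc g a b = "Y" := by intro hv; rw [hv] at h; exact absurd h (by decide)
    have hG : ¬ oc g a b = "G" := by intro hv; rw [hv] at h; exact absurd h (by decide)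
    by_cases hB : oc g a b = "B"
    · rw [stv_eval_B g N M s a b hreg.1 hreg.2 hB]
      split <;> decide
    · rw [stv_eval_other g N M s a b hY hB hG]; exact h
  · simp only [stv, if_neg hreg]; exact h

theorem stv_not_bg (g : List (List String)) (N M s a b : Nat)
    (h : bg (oc g a b) = false) : bg (stv g N M s a b) = false := by
  by_cases hreg : a < N ∧ b < M
  · have hB : ¬ oc g a b = "B" := by intro hv; rw [hv] at h; exact absurd h (by decide)
    have hG : ¬ oc g a b = "G" := by intro hv; rw [hv] at h; exact absurd h (by decide)
    by_cases hY : oc g a b = "Y"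
    · rw [stv_eval_Y g N M s a b hreg.1 hreg.2 hY]
      split <;> decide
    · rw [stv_eval_other g N M s a b hY hB hG]; exact h
  · simp only [stv, if_neg hreg]; exact h

-- if neither run being consumed at step s = i*M+j starts at (i,j) for this cell, its value is unchanged
theorem stv_succ_of_ne (g : List (List String)) (N M i j a b : Nat) (hj : j < M)
    (h1 : a < N → b < M → yg (oc g a b) = true → sY g a b ≠ (i, j))
    (h2' : a < N → b < M → bg (oc g a b) = true → sB g M a b ≠ (i, j)) :
    stv g N M (i * M + j + 1) a b = stv g N M (i * M + j) a b := by
  simp only [stv]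
  by_cases hreg : a < N ∧ b < M
  · rw [if_pos hreg, if_pos hreg]
    have hposY : yg (oc g a b) = true → posc M (sY g a b) ≠ i * M + j := by
      intro hyg hp
      have h2 : (sY g a b).2 < M := by
        obtain ⟨k, _, _, he⟩ := sY_diag g a b
        rw [he]; omega
      have : sY g a b = (i, j) := posc_inj h2 (by simpa [posc] using hj) (by simpa [posc] using hp)
      exact h1 hreg.1 hreg.2 hyg this
    have hposB : bg (oc g a b) = true → posc M (sB g M a b) ≠ i * M + j := by
      intro hbg hp
      have h2 : (sB g M a b).2 < M := by
        obtain ⟨k, _, hk, he⟩ := sB_diag g M a b hreg.2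
        rw [he]; omega
      have : sB g M a b = (i, j) := posc_inj h2 (by simpa [posc] using hj) (by simpa [posc] using hp)
      exact h2' hreg.1 hreg.2 hbg this
    by_cases hY : oc g a b = "Y"
    · have hne := hposY (by rw [yg_iff]; left; exact hY)
      have e : (posc M (sY g a b) < i * M + j + 1) = (posc M (sY g a b) < i * M + j) := by
        apply propext; omega
      simp only [hY, e]
      simp
    · by_cases hB : oc g a b = "B"
      · have hne := hposB (by rw [bg_iff]; left; exact hB)
        have e : (posc M (sB g M a b) < i * M + j + 1) = (posc M (sB g M a b) < i * M + j) := by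
          apply propext; omega
        simp only [hB, e]
        simp
      · by_cases hG : oc g a b = "G"
        · have hneY := hposY (by rw [yg_iff]; right; exact hG)
          have hneB := hposB (by rw [bg_iff]; right; exact hG)
          have eY : (posc M (sY g a b) < i * M + j + 1) = (posc M (sY g a b) < i * M + j) := by
            apply propext; omega
          have eB : (posc M (sB g M a b) < i * M + j + 1) = (posc M (sB g M a b) < i * M + j) := by
            apply propext; omega
          simp only [hG, eY, eB]
        · simp only [if_neg hY, if_neg hB, if_neg hG]
  · rw [if_neg hreg, if_neg hreg]

-- ------- the two consumption lemmas -------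
def SInv (g : List (List String)) (N M s : Nat) (gst : List (List String)) : Prop :=
  shp gst g ∧ ∀ a b, oc gst a b = stv g N M s a b

-- drawing ↘ from a fresh start (i,j): the input grid is stv s off the pending run,
-- "Y" at (i,j) and stv s on the rest of the run; the output is stv (s+1)
theorem drawY_at_start (g : List (List String)) (N M i j : Nat)
    (hb : gbounds g N M) (hi : i < N) (hj : j < M)
    (hyg : yg (oc g i j) = true) (hs : sY g i j = (i, j))
    (hGB : oc g i j = "G" → posc M (sB g M i j) < i * M + j + 1)
    (gst : List (List String)) (hshp : shp gst g)
    (hst : ∀ a b, oc gst a b =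
      if i ≤ a ∧ j ≤ b ∧ a - i = b - j ∧ a - i < rlY g N M i j then
        (if a = i ∧ b = j then "Y" else stv g N M (i * M + j) a b)
      else stv g N M (i * M + j + 1) a b) :
    shp (drawY (N : Int) (M : Int) gst (i : Int) (j : Int)) g ∧
    ∀ a b, oc (drawY (N : Int) (M : Int) gst (i : Int) (j : Int)) a b =
      stv g N M (i * M + j + 1) a b := by
  have hbst : gbounds gst N M := gbounds_of_shp hshp hb
  have hL1 : 1 ≤ rlY g N M i j := by rw [rlY, if_pos ⟨hi, hj, hyg⟩]; omega
  have hstrun : ∀ t, t < rlY g N M i j → oc gst (i + t) (j + t) =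
      if t = 0 then "Y" else stv g N M (i * M + j) (i + t) (j + t) := by
    intro t ht
    rw [hst, if_pos ⟨by omega, by omega, by omega, by omega⟩]
    by_cases h0 : t = 0
    · subst h0
      rw [if_pos ⟨by omega, by omega⟩, if_pos rfl]
    · rw [if_neg (by omega), if_neg h0]
  have hygrun : ∀ t, t < rlY g N M i j → yg (oc gst (i + t) (j + t)) = true := by
    intro t ht
    rw [hstrun t ht]
    by_cases h0 : t = 0
    · rw [if_pos h0]; decide
    · rw [if_neg h0]
      have hm := rlY_mem g N M t i j ht
      have hsYt := sY_run g N M i j hs t ht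
      have hpos : ¬ posc M (sY g (i + t) (j + t)) < i * M + j := by
        rw [hsYt]; simp [posc]
      rcases (yg_iff _).mp hm.2.2 with hv | hv
      · rw [stv_eval_Y g N M _ _ _ hm.1 hm.2.1 hv, if_neg hpos]; decide
      · rw [stv_eval_G g N M _ _ _ hm.1 hm.2.1 hv, if_neg hpos]
        split <;> decide
  have hLst : rlY gst N M i j = rlY g N M i j := by
    refine rlY_eq_of gst N M _ i j
      (fun t ht => ⟨(rlY_mem g N M t i j ht).1, (rlY_mem g N M t i j ht).2.1, hygrun t ht⟩) ?_
    intro hcc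
    have hstopg := rlY_stop g N M (rlY g N M i j) i j rfl
    have hnyg : yg (oc g (i + rlY g N M i j) (j + rlY g N M i j)) = false := by
      rcases Bool.eq_false_or_eq_true (yg (oc g (i + rlY g N M i j) (j + rlY g N M i j))) with h | h
      · exact absurd ⟨hcc.1, hcc.2.1, h⟩ hstopg
      · exact h
    have hval : oc gst (i + rlY g N M i j) (j + rlY g N M i j) =
        stv g N M (i * M + j + 1) (i + rlY g N M i j) (j + rlY g N M i j) := by
      rw [hst, if_neg (by omega)]
    have hygv := hcc.2.2
    rw [hval] at hygv
    rw [stv_not_yg g N M _ _ _ hnyg] at hygv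
    exact absurd hygv (by decide)
  obtain ⟨dshp, doc⟩ := drawY_spec N M (rlY g N M i j) gst i j hbst hLst
  refine ⟨shp_trans dshp hshp, fun a b => ?_⟩
  rw [doc a b]
  by_cases hon : i ≤ a ∧ j ≤ b ∧ a - i = b - j ∧ a - i < rlY g N M i j
  · obtain ⟨t, rfl, rfl⟩ : ∃ t, a = i + t ∧ b = j + t :=
      ⟨a - i, by omega, by omega⟩
    rw [if_pos hon]
    have ht : t < rlY g N M i j := by
      have := hon.2.2.2; omega
    have hm := rlY_mem g N M t i j ht
    have hsYt := sY_run g N M i j hs t ht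
    have hposY : posc M (sY g (i + t) (j + t)) = i * M + j := by rw [hsYt]; rfl
    have hposBne : 1 ≤ t → posc M (sB g M (i + t) (j + t)) ≠ i * M + j := by
      intro ht1 hp
      obtain ⟨k, hk1, hk2, he⟩ := sB_diag g M (i + t) (j + t) hm.2.1
      have heq : sB g M (i + t) (j + t) = (i, j) :=
        posc_inj (by rw [he]; omega) (by simpa [posc] using hj) (by simpa [posc] using hp)
      rw [he] at heq
      simp only [Prod.mk.injEq] at heq
      omega
    rw [hstrun t ht]
    by_cases h0 : t = 0
    · subst h0
      rw [if_pos rfl]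
      simp only [Nat.add_zero] at *
      rcases (yg_iff _).mp hyg with hv | hv
      · rw [stv_eval_Y g N M _ _ _ hi hj hv, if_pos (by omega)]; decide
      · rw [stv_eval_G g N M _ _ _ hi hj hv, if_pos (by omega), if_pos (hGB hv)]; decide
    · rw [if_neg h0]
      have hBne := hposBne (by omega)
      rcases (yg_iff _).mp hm.2.2 with hv | hv
      · rw [stv_eval_Y g N M _ _ _ hm.1 hm.2.1 hv, stv_eval_Y g N M _ _ _ hm.1 hm.2.1 hv,
          if_neg (by omega : ¬ posc M (sY g (i + t) (j + t)) < i * M + j),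
          if_pos (by omega : posc M (sY g (i + t) (j + t)) < i * M + j + 1)]
        decide
      · rw [stv_eval_G g N M _ _ _ hm.1 hm.2.1 hv, stv_eval_G g N M _ _ _ hm.1 hm.2.1 hv,
          if_neg (by omega : ¬ posc M (sY g (i + t) (j + t)) < i * M + j),
          if_pos (by omega : posc M (sY g (i + t) (j + t)) < i * M + j + 1)]
        by_cases hcB : posc M (sB g M (i + t) (j + t)) < i * M + j
        · rw [if_pos hcB, if_pos (by omega)]
          decide
        · rw [if_neg hcB, if_neg (by omega)]
          decide
  · rw [if_neg hon, hst, if_neg hon]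

-- drawing ↙ from a fresh start (i,j) whose cell is currently "B"
theorem drawB_at_start_B (g : List (List String)) (N M i j : Nat)
    (hb : gbounds g N M) (hi : i < N) (hj : j < M)
    (hbg : bg (oc g i j) = true) (hs : sB g M i j = (i, j))
    (hGY : oc g i j = "G" → posc M (sY g i j) < i * M + j)
    (gst : List (List String)) (hshp : shp gst g)
    (hst : ∀ a b, oc gst a b = stv g N M (i * M + j) a b) :
    shp (drawB (N : Int) (M : Int) gst (i : Int) (j : Int)) g ∧
    ∀ a b, oc (drawB (N : Int) (M : Int) gst (i : Int) (j : Int)) a b =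
      stv g N M (i * M + j + 1) a b := by
  have hbst : gbounds gst N M := gbounds_of_shp hshp hb
  have hL1 : 1 ≤ rlB g N M i j := by rw [rlB, if_pos ⟨hi, hj, hbg⟩]; omega
  -- the ↘ start of a ↙-run cell other than (i,j) is never (i,j)
  have hposYne : ∀ t, t ≤ j → i + t < N → j - t < M → 1 ≤ t →
      posc M (sY g (i + t) (j - t)) ≠ i * M + j := by
    intro t htj h1 h2 ht1 hp
    obtain ⟨k, hk1, hk2, he⟩ := sY_diag g (i + t) (j - t)
    have heq : sY g (i + t) (j - t) = (i, j) :=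
      @posc_inj M (sY g (i + t) (j - t)) (i, j) (by rw [he]; omega)
        (by simpa [posc] using hj) (by simpa [posc] using hp)
    rw [he] at heq
    simp only [Prod.mk.injEq] at heq
    omega
  -- value of gst on the ↙ run cells
  have hbgrun : ∀ t, t < rlB g N M i j → bg (oc gst (i + t) (j - t)) = true := by
    intro t ht
    have hm := rlB_mem g N M t i j ht
    have hsBt := sB_run g N M i j hj hs t ht
    have hpos : ¬ posc M (sB g M (i + t) (j - t)) < i * M + j := by
      rw [hsBt]; simp [posc]
    rw [hst]
    rcases (bg_iff _).mp hm.2.2.2 with hv | hv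
    · rw [stv_eval_B g N M _ _ _ hm.2.1 hm.2.2.1 hv, if_neg hpos]; decide
    · rw [stv_eval_G g N M _ _ _ hm.2.1 hm.2.2.1 hv]
      rw [if_neg hpos]
      split <;> decide
  have hLst : rlB gst N M i j = rlB g N M i j := by
    refine rlB_eq_of gst N M _ i j
      (fun t ht => ⟨(rlB_mem g N M t i j ht).1, (rlB_mem g N M t i j ht).2.1,
        (rlB_mem g N M t i j ht).2.2.1, hbgrun t ht⟩) ?_
    rcases rlB_stop g N M (rlB g N M i j) i j rfl with h | h
    · left; omega
    · right
      intro hcc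
      refine h ⟨hcc.1, hcc.2.1, ?_⟩
      have hv := hcc.2.2
      rw [hst] at hv
      rcases Bool.eq_false_or_eq_true (bg (oc g (i + rlB g N M i j) (j - rlB g N M i j))) with hh | hh
      · exact hh
      · rw [stv_not_bg g N M _ _ _ hh] at hv
        exact absurd hv (by decide)
  obtain ⟨dshp, doc⟩ := drawB_spec N M (rlB g N M i j) gst i j hj hbst hLst
  refine ⟨shp_trans dshp hshp, fun a b => ?_⟩
  rw [doc a b]
  by_cases hon : i ≤ a ∧ b ≤ j ∧ a - i = j - b ∧ a - i < rlB g N M i j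
  · have htj : a - i ≤ j := by
      have := rlB_mem g N M (a - i) i j hon.2.2.2
      omega
    obtain ⟨t, rfl, rfl⟩ : ∃ t, a = i + t ∧ b = j - t := ⟨a - i, by omega, by omega⟩
    rw [if_pos hon]
    have ht : t < rlB g N M i j := by have := hon.2.2.2; omega
    have hm := rlB_mem g N M t i j ht
    have hsBt := sB_run g N M i j hj hs t ht
    have hposB : posc M (sB g M (i + t) (j - t)) = i * M + j := by rw [hsBt]; rfl
    rw [hst]
    by_cases h0 : t = 0
    · subst h0
      simp only [Nat.add_zero, Nat.sub_zero] at *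
      rcases (bg_iff _).mp hbg with hv | hv
      · rw [stv_eval_B g N M _ _ _ hi hj hv, stv_eval_B g N M _ _ _ hi hj hv,
          if_neg (by omega : ¬ posc M (sB g M i j) < i * M + j),
          if_pos (by omega : posc M (sB g M i j) < i * M + j + 1)]
        decide
      · have hy := hGY hv
        rw [stv_eval_G g N M _ _ _ hi hj hv, stv_eval_G g N M _ _ _ hi hj hv,
          if_pos (by omega : posc M (sY g i j) < i * M + j),
          if_pos (by omega : posc M (sY g i j) < i * M + j + 1),
          if_neg (by omega : ¬ posc M (sB g M i j) < i * M + j),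
          if_pos (by omega : posc M (sB g M i j) < i * M + j + 1)]
        decide
    · have hYne := hposYne t (by omega) hm.2.1 hm.2.2.1 (by omega)
      rcases (bg_iff _).mp hm.2.2.2 with hv | hv
      · rw [stv_eval_B g N M _ _ _ hm.2.1 hm.2.2.1 hv, stv_eval_B g N M _ _ _ hm.2.1 hm.2.2.1 hv,
          if_neg (by omega : ¬ posc M (sB g M (i + t) (j - t)) < i * M + j),
          if_pos (by omega : posc M (sB g M (i + t) (j - t)) < i * M + j + 1)]
        decide
      · rw [stv_eval_G g N M _ _ _ hm.2.1 hm.2.2.1 hv, stv_eval_G g N M _ _ _ hm.2.1 hm.2.2.1 hv,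
          if_neg (by omega : ¬ posc M (sB g M (i + t) (j - t)) < i * M + j),
          if_pos (by omega : posc M (sB g M (i + t) (j - t)) < i * M + j + 1)]
        by_cases hcY : posc M (sY g (i + t) (j - t)) < i * M + j
        · rw [if_pos hcY, if_pos (by omega)]
          decide
        · rw [if_neg hcY,
            if_neg (by omega : ¬ posc M (sY g (i + t) (j - t)) < i * M + j + 1),
            if_neg (by omega : ¬ posc M (sB g M (i + t) (j - t)) < i * M + j),
            if_pos (by omega : posc M (sB g M (i + t) (j - t)) < i * M + j + 1)]
          decide
  · rw [if_neg hon, hst]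
    refine Eq.symm (stv_succ_of_ne g N M i j a b hj ?_ ?_)
    · intro haN hbM hyg hsy
      obtain ⟨hygij, hsij⟩ := sY_target g i j a b hyg hsy
      rcases (yg_iff _).mp hygij with hv | hv
      · rcases (bg_iff _).mp hbg with hv2 | hv2 <;> rw [hv] at hv2 <;> exact absurd hv2 (by decide)
      · have := hGY hv
        rw [hsij] at this
        simp [posc] at this
    · intro haN hbM hbg2 hsb
      obtain ⟨t, ht, htj, he1, he2⟩ := sB_mem_run g N M a i j b haN hbM hbg2 hsb
      exact hon ⟨by omega, by omega, by omega, by omega⟩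

theorem drawB_at_start_G (g : List (List String)) (N M i j : Nat)
    (hb : gbounds g N M) (hi : i < N) (hj : j < M)
    (hG : oc g i j = "G") (hsY : sY g i j = (i, j)) (hsB : sB g M i j = (i, j))
    (gst : List (List String)) (hshp : shp gst g)
    (hst : ∀ a b, oc gst a b = stv g N M (i * M + j) a b) :
    shp (drawB (N : Int) (M : Int) gst (i : Int) (j : Int)) g ∧
    ∀ a b, oc (drawB (N : Int) (M : Int) gst (i : Int) (j : Int)) a b =
      if i ≤ a ∧ j ≤ b ∧ a - i = b - j ∧ a - i < rlY g N M i j then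
        (if a = i ∧ b = j then "Y" else stv g N M (i * M + j) a b)
      else stv g N M (i * M + j + 1) a b := by
  have hbst : gbounds gst N M := gbounds_of_shp hshp hb
  have hyg : yg (oc g i j) = true := by rw [hG]; decide
  have hbg : bg (oc g i j) = true := by rw [hG]; decide
  have hLY1 : 1 ≤ rlY g N M i j := by rw [rlY, if_pos ⟨hi, hj, hyg⟩]; omega
  have hL1 : 1 ≤ rlB g N M i j := by rw [rlB, if_pos ⟨hi, hj, hbg⟩]; omega
  have hposYne : ∀ t, t ≤ j → i + t < N → j - t < M → 1 ≤ t →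
      posc M (sY g (i + t) (j - t)) ≠ i * M + j := by
    intro t htj h1 h2 ht1 hp
    obtain ⟨k, hk1, hk2, he⟩ := sY_diag g (i + t) (j - t)
    have heq : sY g (i + t) (j - t) = (i, j) :=
      @posc_inj M (sY g (i + t) (j - t)) (i, j) (by rw [he]; omega)
        (by simpa [posc] using hj) (by simpa [posc] using hp)
    rw [he] at heq
    simp only [Prod.mk.injEq] at heq
    omega
  have hbgrun : ∀ t, t < rlB g N M i j → bg (oc gst (i + t) (j - t)) = true := by
    intro t ht
    have hm := rlB_mem g N M t i j ht
    have hsBt := sB_run g N M i j hj hsB t ht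
    have hpos : ¬ posc M (sB g M (i + t) (j - t)) < i * M + j := by
      rw [hsBt]; simp [posc]
    rw [hst]
    rcases (bg_iff _).mp hm.2.2.2 with hv | hv
    · rw [stv_eval_B g N M _ _ _ hm.2.1 hm.2.2.1 hv, if_neg hpos]; decide
    · rw [stv_eval_G g N M _ _ _ hm.2.1 hm.2.2.1 hv]
      rw [if_neg hpos]
      split <;> decide
  have hLst : rlB gst N M i j = rlB g N M i j := by
    refine rlB_eq_of gst N M _ i j
      (fun t ht => ⟨(rlB_mem g N M t i j ht).1, (rlB_mem g N M t i j ht).2.1,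
        (rlB_mem g N M t i j ht).2.2.1, hbgrun t ht⟩) ?_
    rcases rlB_stop g N M (rlB g N M i j) i j rfl with h | h
    · left; omega
    · right
      intro hcc
      refine h ⟨hcc.1, hcc.2.1, ?_⟩
      have hv := hcc.2.2
      rw [hst] at hv
      rcases Bool.eq_false_or_eq_true (bg (oc g (i + rlB g N M i j) (j - rlB g N M i j))) with hh | hh
      · exact hh
      · rw [stv_not_bg g N M _ _ _ hh] at hv
        exact absurd hv (by decide)
  obtain ⟨dshp, doc⟩ := drawB_spec N M (rlB g N M i j) gst i j hj hbst hLst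
  refine ⟨shp_trans dshp hshp, fun a b => ?_⟩
  rw [doc a b]
  by_cases hon : i ≤ a ∧ b ≤ j ∧ a - i = j - b ∧ a - i < rlB g N M i j
  · have htj : a - i ≤ j := by
      have := rlB_mem g N M (a - i) i j hon.2.2.2
      omega
    obtain ⟨t, rfl, rfl⟩ : ∃ t, a = i + t ∧ b = j - t := ⟨a - i, by omega, by omega⟩
    rw [if_pos hon]
    have ht : t < rlB g N M i j := by have := hon.2.2.2; omega
    have hm := rlB_mem g N M t i j ht
    have hsBt := sB_run g N M i j hj hsB t ht
    have hposB : posc M (sB g M (i + t) (j - t)) = i * M + j := by rw [hsBt]; rfl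
    rw [hst]
    by_cases h0 : t = 0
    · subst h0
      simp only [Nat.add_zero, Nat.sub_zero] at *
      rw [if_pos ⟨by omega, by omega, by omega, by omega⟩, if_pos (by trivial)]
      rw [stv_eval_G g N M _ _ _ hi hj hG,
        if_neg (by rw [hsY]; simp [posc]),
        if_neg (by omega : ¬ posc M (sB g M i j) < i * M + j)]
      decide
    · -- a ↙-run cell below (i,j) is never on the ↘ run
      rw [if_neg (by
        rintro ⟨hc1, hc2, hc3, hc4⟩
        omega)]
      have hYne := hposYne t (by omega) hm.2.1 hm.2.2.1 (by omega)
      rcases (bg_iff _).mp hm.2.2.2 with hv | hv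
      · rw [stv_eval_B g N M _ _ _ hm.2.1 hm.2.2.1 hv, stv_eval_B g N M _ _ _ hm.2.1 hm.2.2.1 hv,
          if_neg (by omega : ¬ posc M (sB g M (i + t) (j - t)) < i * M + j),
          if_pos (by omega : posc M (sB g M (i + t) (j - t)) < i * M + j + 1)]
        decide
      · rw [stv_eval_G g N M _ _ _ hm.2.1 hm.2.2.1 hv, stv_eval_G g N M _ _ _ hm.2.1 hm.2.2.1 hv,
          if_neg (by omega : ¬ posc M (sB g M (i + t) (j - t)) < i * M + j),
          if_pos (by omega : posc M (sB g M (i + t) (j - t)) < i * M + j + 1)]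
        by_cases hcY : posc M (sY g (i + t) (j - t)) < i * M + j
        · rw [if_pos hcY, if_pos (by omega)]
          decide
        · rw [if_neg hcY,
            if_neg (by omega : ¬ posc M (sY g (i + t) (j - t)) < i * M + j + 1),
            if_neg (by omega : ¬ posc M (sB g M (i + t) (j - t)) < i * M + j),
            if_pos (by omega : posc M (sB g M (i + t) (j - t)) < i * M + j + 1)]
          decide
  · rw [if_neg hon, hst]
    by_cases honY : i ≤ a ∧ j ≤ b ∧ a - i = b - j ∧ a - i < rlY g N M i j
    · rw [if_pos honY]
      rw [if_neg (by
        rintro ⟨rfl, rfl⟩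
        exact hon ⟨by omega, by omega, by omega, by omega⟩)]
    · rw [if_neg honY]
      refine Eq.symm (stv_succ_of_ne g N M i j a b hj ?_ ?_)
      · intro haN hbM hyg2 hsy
        obtain ⟨t, ht, he1, he2⟩ := sY_mem_run g N M a i j b haN hbM hyg2 hsy
        exact honY ⟨by omega, by omega, by omega, by omega⟩
      · intro haN hbM hbg2 hsb
        obtain ⟨t, ht, htj, he1, he2⟩ := sB_mem_run g N M a i j b haN hbM hbg2 hsb
        exact hon ⟨by omega, by omega, by omega, by omega⟩

-- ------- the step lemma -------
set_option maxHeartbeats 4000000 in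
theorem step_spec (g : List (List String)) (N M i j : Nat) (gst : List (List String)) (c : Int)
    (hb : gbounds g N M) (hi : i < N) (hj : j < M) (hSInv : SInv g N M (i * M + j) gst) :
    (stepA (N : Int) (M : Int) gst c (i : Int) (j : Int)).2 = c + contrib g M i j ∧
    SInv g N M (i * M + j + 1) (stepA (N : Int) (M : Int) gst c (i : Int) (j : Int)).1 := by
  obtain ⟨hshp, hoc⟩ := hSInv
  have hcell : cellG gst (i : Int) (j : Int) = stv g N M (i * M + j) i j := by
    rw [cellG_nat]; exact hoc i j
  have hposYlt : sY g i j ≠ (i, j) → posc M (sY g i j) < i * M + j := fun h => by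
    simpa [posc] using (posc_sY_le g M i j).2 h
  have hposBlt : sB g M i j ≠ (i, j) → posc M (sB g M i j) < i * M + j := fun h => by
    simpa [posc] using (posc_sB_le g M i j hj).2 h
  by_cases hY : oc g i j = "Y"
  · have hyg : yg (oc g i j) = true := by rw [hY]; decide
    by_cases hsYij : sY g i j = (i, j)
    · -- fresh Y: the Y branch fires and draws the ↘ run
      have hcur : cellG gst (i : Int) (j : Int) = "Y" := by
        rw [hcell, stv_eval_Y g N M _ _ _ hi hj hY, if_neg (by rw [hsYij]; simp [posc])]
      have hst' : ∀ a b, oc gst a b =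
          if i ≤ a ∧ j ≤ b ∧ a - i = b - j ∧ a - i < rlY g N M i j then
            (if a = i ∧ b = j then "Y" else stv g N M (i * M + j) a b)
          else stv g N M (i * M + j + 1) a b := by
        intro a b
        rw [hoc a b]
        by_cases hon : i ≤ a ∧ j ≤ b ∧ a - i = b - j ∧ a - i < rlY g N M i j
        · rw [if_pos hon]
          by_cases hab : a = i ∧ b = j
          · obtain ⟨rfl, rfl⟩ := hab
            rw [if_pos ⟨rfl, rfl⟩]
            rw [stv_eval_Y g N M _ _ _ hi hj hY, if_neg (by rw [hsYij]; simp [posc])]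
          · rw [if_neg hab]
        · rw [if_neg hon]
          refine Eq.symm (stv_succ_of_ne g N M i j a b hj ?_ ?_)
          · intro haN hbM hyg2 hsy
            obtain ⟨t, ht, he1, he2⟩ := sY_mem_run g N M a i j b haN hbM hyg2 hsy
            exact hon ⟨by omega, by omega, by omega, by omega⟩
          · intro haN hbM hbg2 hsb
            have := (sB_target g M i j a b hbg2 hsb).1
            rw [hY] at this
            exact absurd this (by decide)
      obtain ⟨dshp, doc⟩ := drawY_at_start g N M i j hb hi hj hyg hsYij
        (fun hG' => absurd (hY.symm.trans hG') (by decide)) gst hshp hst'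
      have h2 : cellG (drawY (N : Int) (M : Int) gst (i : Int) (j : Int)) (i : Int) (j : Int) = "X" := by
        rw [cellG_nat, doc i j, stv_eval_Y g N M _ _ _ hi hj hY,
          if_pos (by rw [hsYij]; simp [posc])]
      have hres : stepA (N : Int) (M : Int) gst c (i : Int) (j : Int) =
          (drawY (N : Int) (M : Int) gst (i : Int) (j : Int), c + 1) := by
        simp [stepA, hcur, h2]
      rw [hres]
      refine ⟨?_, dshp, doc⟩
      simp [contrib, hY, hsYij, yg, bg]
    · -- consumed Y: the cell already shows "X" and nothing happens
      have hcur : cellG gst (i : Int) (j : Int) = "X" := by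
        rw [hcell, stv_eval_Y g N M _ _ _ hi hj hY, if_pos (hposYlt hsYij)]
      have hres : stepA (N : Int) (M : Int) gst c (i : Int) (j : Int) = (gst, c) := by
        simp [stepA, hcur]
      rw [hres]
      refine ⟨?_, hshp, fun a b => (hoc a b).trans (Eq.symm (stv_succ_of_ne g N M i j a b hj ?_ ?_))⟩
      · simp [contrib, hY, hsYij, yg, bg]
      · intro haN hbM hyg2 hsy
        exact absurd (sY_target g i j a b hyg2 hsy).2 hsYij
      · intro haN hbM hbg2 hsb
        have := (sB_target g M i j a b hbg2 hsb).1
        rw [hY] at this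
        exact absurd this (by decide)
  · by_cases hB : oc g i j = "B"
    · have hbg : bg (oc g i j) = true := by rw [hB]; decide
      by_cases hsBij : sB g M i j = (i, j)
      · -- fresh B: the B branch fires and draws the ↙ run
        have hcur : cellG gst (i : Int) (j : Int) = "B" := by
          rw [hcell, stv_eval_B g N M _ _ _ hi hj hB, if_neg (by rw [hsBij]; simp [posc])]
        obtain ⟨dshp, doc⟩ := drawB_at_start_B g N M i j hb hi hj hbg hsBij
          (fun hG' => absurd (hB.symm.trans hG') (by decide)) gst hshp hoc
        have h2 : cellG (drawB (N : Int) (M : Int) gst (i : Int) (j : Int)) (i : Int) (j : Int) = "X" := by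
          rw [cellG_nat, doc i j, stv_eval_B g N M _ _ _ hi hj hB,
            if_pos (by rw [hsBij]; simp [posc])]
        have hres : stepA (N : Int) (M : Int) gst c (i : Int) (j : Int) =
            (drawB (N : Int) (M : Int) gst (i : Int) (j : Int), c + 1) := by
          simp [stepA, hcur, h2]
        rw [hres]
        refine ⟨?_, dshp, doc⟩
        simp [contrib, hB, hsBij, yg, bg]
      · have hcur : cellG gst (i : Int) (j : Int) = "X" := by
          rw [hcell, stv_eval_B g N M _ _ _ hi hj hB, if_pos (hposBlt hsBij)]
        have hres : stepA (N : Int) (M : Int) gst c (i : Int) (j : Int) = (gst, c) := by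
          simp [stepA, hcur]
        rw [hres]
        refine ⟨?_, hshp, fun a b => (hoc a b).trans (Eq.symm (stv_succ_of_ne g N M i j a b hj ?_ ?_))⟩
        · simp [contrib, hB, hsBij, yg, bg]
        · intro haN hbM hyg2 hsy
          have := (sY_target g i j a b hyg2 hsy).1
          rw [hB] at this
          exact absurd this (by decide)
        · intro haN hbM hbg2 hsb
          exact absurd (sB_target g M i j a b hbg2 hsb).2 hsBij
    · by_cases hG : oc g i j = "G"
      · have hyg : yg (oc g i j) = true := by rw [hG]; decide
        have hbg : bg (oc g i j) = true := by rw [hG]; decide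
        by_cases hsYij : sY g i j = (i, j)
        · by_cases hsBij : sB g M i j = (i, j)
          · -- doubly fresh G: the G branch fires, drawing ↙ then ↘
            have hcur : cellG gst (i : Int) (j : Int) = "G" := by
              rw [hcell, stv_eval_G g N M _ _ _ hi hj hG,
                if_neg (by rw [hsYij]; simp [posc]), if_neg (by rw [hsBij]; simp [posc])]
            obtain ⟨mshp, mdoc⟩ := drawB_at_start_G g N M i j hb hi hj hG hsYij hsBij gst hshp hoc
            obtain ⟨dshp, doc⟩ := drawY_at_start g N M i j hb hi hj hyg hsYij
              (fun _ => by rw [hsBij]; simp [posc])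
              (drawB (N : Int) (M : Int) gst (i : Int) (j : Int)) mshp mdoc
            have hres : stepA (N : Int) (M : Int) gst c (i : Int) (j : Int) =
                (drawY (N : Int) (M : Int) (drawB (N : Int) (M : Int) gst (i : Int) (j : Int)) (i : Int) (j : Int), c + 2) := by
              simp [stepA, hcur]
            rw [hres]
            refine ⟨?_, dshp, doc⟩
            simp [contrib, hG, hsYij, hsBij, yg, bg]
          · -- G whose ↙ run is already consumed: it shows "Y" and the Y branch fires
            have hcur : cellG gst (i : Int) (j : Int) = "Y" := by
              rw [hcell, stv_eval_G g N M _ _ _ hi hj hG,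
                if_neg (by rw [hsYij]; simp [posc]), if_pos (hposBlt hsBij)]
            have hst' : ∀ a b, oc gst a b =
                if i ≤ a ∧ j ≤ b ∧ a - i = b - j ∧ a - i < rlY g N M i j then
                  (if a = i ∧ b = j then "Y" else stv g N M (i * M + j) a b)
                else stv g N M (i * M + j + 1) a b := by
              intro a b
              rw [hoc a b]
              by_cases hon : i ≤ a ∧ j ≤ b ∧ a - i = b - j ∧ a - i < rlY g N M i j
              · rw [if_pos hon]
                by_cases hab : a = i ∧ b = j
                · obtain ⟨rfl, rfl⟩ := hab
                  rw [if_pos ⟨rfl, rfl⟩]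
                  rw [stv_eval_G g N M _ _ _ hi hj hG,
                    if_neg (by rw [hsYij]; simp [posc]), if_pos (hposBlt hsBij)]
                · rw [if_neg hab]
              · rw [if_neg hon]
                refine Eq.symm (stv_succ_of_ne g N M i j a b hj ?_ ?_)
                · intro haN hbM hyg2 hsy
                  obtain ⟨t, ht, he1, he2⟩ := sY_mem_run g N M a i j b haN hbM hyg2 hsy
                  exact hon ⟨by omega, by omega, by omega, by omega⟩
                · intro haN hbM hbg2 hsb
                  exact absurd (sB_target g M i j a b hbg2 hsb).2 hsBij
            obtain ⟨dshp, doc⟩ := drawY_at_start g N M i j hb hi hj hyg hsYij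
              (fun _ => by have := hposBlt hsBij; omega) gst hshp hst'
            have h2 : cellG (drawY (N : Int) (M : Int) gst (i : Int) (j : Int)) (i : Int) (j : Int) = "X" := by
              rw [cellG_nat, doc i j, stv_eval_G g N M _ _ _ hi hj hG,
                if_pos (by rw [hsYij]; simp [posc]), if_pos (by have := hposBlt hsBij; omega)]
            have hres : stepA (N : Int) (M : Int) gst c (i : Int) (j : Int) =
                (drawY (N : Int) (M : Int) gst (i : Int) (j : Int), c + 1) := by
              simp [stepA, hcur, h2]
            rw [hres]
            refine ⟨?_, dshp, doc⟩
            simp [contrib, hG, hsYij, hsBij, yg, bg]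
        · by_cases hsBij : sB g M i j = (i, j)
          · -- G whose ↘ run is already consumed: it shows "B" and the B branch fires
            have hcur : cellG gst (i : Int) (j : Int) = "B" := by
              rw [hcell, stv_eval_G g N M _ _ _ hi hj hG,
                if_pos (hposYlt hsYij), if_neg (by rw [hsBij]; simp [posc])]
            obtain ⟨dshp, doc⟩ := drawB_at_start_B g N M i j hb hi hj hbg hsBij
              (fun _ => hposYlt hsYij) gst hshp hoc
            have h2 : cellG (drawB (N : Int) (M : Int) gst (i : Int) (j : Int)) (i : Int) (j : Int) = "X" := by
              rw [cellG_nat, doc i j, stv_eval_G g N M _ _ _ hi hj hG,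
                if_pos (by have := hposYlt hsYij; omega), if_pos (by rw [hsBij]; simp [posc])]
            have hres : stepA (N : Int) (M : Int) gst c (i : Int) (j : Int) =
                (drawB (N : Int) (M : Int) gst (i : Int) (j : Int), c + 1) := by
              simp [stepA, hcur, h2]
            rw [hres]
            refine ⟨?_, dshp, doc⟩
            simp [contrib, hG, hsYij, hsBij, yg, bg]
          · -- fully consumed G shows "X"
            have hcur : cellG gst (i : Int) (j : Int) = "X" := by
              rw [hcell, stv_eval_G g N M _ _ _ hi hj hG,
                if_pos (hposYlt hsYij), if_pos (hposBlt hsBij)]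
            have hres : stepA (N : Int) (M : Int) gst c (i : Int) (j : Int) = (gst, c) := by
              simp [stepA, hcur]
            rw [hres]
            refine ⟨?_, hshp, fun a b => (hoc a b).trans (Eq.symm (stv_succ_of_ne g N M i j a b hj ?_ ?_))⟩
            · simp [contrib, hG, hsYij, hsBij, yg, bg]
            · intro haN hbM hyg2 hsy
              exact absurd (sY_target g i j a b hyg2 hsy).2 hsYij
            · intro haN hbM hbg2 hsb
              exact absurd (sB_target g M i j a b hbg2 hsb).2 hsBij
      · -- any other cell: no branch fires, nothing changes
        have hcur : cellG gst (i : Int) (j : Int) = oc g i j := by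
          rw [hcell, stv_eval_other g N M _ _ _ hY hB hG]
        have hres : stepA (N : Int) (M : Int) gst c (i : Int) (j : Int) = (gst, c) := by
          simp only [stepA]
          rw [hcur, if_neg hY]
          dsimp only
          rw [hcur, if_neg hB]
          dsimp only
          rw [hcur, if_neg hG]
        rw [hres]
        have hyg : yg (oc g i j) = false := by simp [yg, hY, hG]
        have hbg : bg (oc g i j) = false := by simp [bg, hB, hG]
        refine ⟨?_, hshp, fun a b => (hoc a b).trans (Eq.symm (stv_succ_of_ne g N M i j a b hj ?_ ?_))⟩
        · simp [contrib, hyg, hbg]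
        · intro haN hbM hyg2 hsy
          have hh := (sY_target g i j a b hyg2 hsy).1
          rw [hyg] at hh
          exact absurd hh (by decide)
        · intro haN hbM hbg2 hsb
          have hh := (sB_target g M i j a b hbg2 hsb).1
          rw [hbg] at hh
          exact absurd hh (by decide)

-- ------- assembling the scan -------
theorem row_spec (g : List (List String)) (N M i : Nat) (hb : gbounds g N M) (hi : i < N) :
    ∀ (k j0 : Nat), j0 + k = M → ∀ (gst : List (List String)) (c : Int),
    SInv g N M (i * M + j0) gst →
    (((List.range' j0 k).map (fun j : Nat => (j : Int))).foldl
        (fun st j => stepA (N : Int) (M : Int) st.1 st.2 (i : Int) j) (gst, c)).2 =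
      c + ((List.range' j0 k).map (fun j => contrib g M i j)).sum ∧
    SInv g N M (i * M + j0 + k)
      (((List.range' j0 k).map (fun j : Nat => (j : Int))).foldl
        (fun st j => stepA (N : Int) (M : Int) st.1 st.2 (i : Int) j) (gst, c)).1 := by
  intro k
  induction k with
  | zero =>
    intro j0 hM gst c hInv
    simp only [List.range'_zero, List.map_nil, List.foldl_nil, List.sum_nil, Nat.add_zero]
    exact ⟨by omega, hInv⟩
  | succ k ih =>
    intro j0 hM gst c hInv
    have hj0 : j0 < M := by omega
    obtain ⟨hcount, hInv'⟩ := step_spec g N M i j0 gst c hb hi hj0 hInv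
    have hInv'' : SInv g N M (i * M + (j0 + 1))
        (stepA (N : Int) (M : Int) gst c (i : Int) (j0 : Int)).1 := by
      have e : i * M + (j0 + 1) = i * M + j0 + 1 := by omega
      rw [e]; exact hInv'
    obtain ⟨ihc, ihi⟩ := ih (j0 + 1) (by omega)
      (stepA (N : Int) (M : Int) gst c (i : Int) (j0 : Int)).1
      (stepA (N : Int) (M : Int) gst c (i : Int) (j0 : Int)).2 hInv''
    rw [List.range'_succ]
    simp only [List.map_cons, List.foldl_cons, List.sum_cons]
    rw [Prod.mk.eta] at ihc ihi
    constructor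
    · rw [ihc, hcount]
      omega
    · have e3 : i * M + (j0 + 1) + k = i * M + j0 + (k + 1) := by omega
      rw [e3] at ihi
      exact ihi

theorem pyRange_natCast (K : Nat) :
    PySem.List.pyRange 0 (K : Int) 1 = (List.range K).map (fun k : Nat => (k : Int)) := by
  rw [PySem.List.pyRange_one]
  simp

theorem grid_spec (g : List (List String)) (N M : Nat) (hb : gbounds g N M) :
    func g (N : Int) (M : Int) = bsum g N M := by
  have outer : ∀ (k i0 : Nat), i0 + k = N → ∀ (gst : List (List String)) (c : Int),
      SInv g N M (i0 * M) gst →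
      (((List.range' i0 k).map (fun i : Nat => (i : Int))).foldl
          (fun st i => ((List.range M).map (fun j : Nat => (j : Int))).foldl
            (fun st j => stepA (N : Int) (M : Int) st.1 st.2 i j) st) (gst, c)).2 =
        c + ((List.range' i0 k).map
          (fun i => ((List.range M).map (fun j => contrib g M i j)).sum)).sum := by
    intro k
    induction k with
    | zero =>
      intro i0 hN gst c hInv
      simp
    | succ k ih =>
      intro i0 hN gst c hInv
      have hi0 : i0 < N := by omega
      have hrow := row_spec g N M i0 hb hi0 M 0 (by omega) gst c
        (by have e : i0 * M + 0 = i0 * M := by omega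
            rw [e]; exact hInv)
      rw [← List.range_eq_range'] at hrow
      obtain ⟨hrc, hri⟩ := hrow
      have hInv'' : SInv g N M ((i0 + 1) * M)
          (((List.range M).map (fun j : Nat => (j : Int))).foldl
            (fun st j => stepA (N : Int) (M : Int) st.1 st.2 (i0 : Int) j) (gst, c)).1 := by
        have e : (i0 + 1) * M = i0 * M + 0 + M := by ring
        rw [e]; exact hri
      have ihr := ih (i0 + 1) (by omega)
        (((List.range M).map (fun j : Nat => (j : Int))).foldl
          (fun st j => stepA (N : Int) (M : Int) st.1 st.2 (i0 : Int) j) (gst, c)).1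
        (((List.range M).map (fun j : Nat => (j : Int))).foldl
          (fun st j => stepA (N : Int) (M : Int) st.1 st.2 (i0 : Int) j) (gst, c)).2 hInv''
      rw [List.range'_succ]
      simp only [List.map_cons, List.foldl_cons, List.sum_cons]
      rw [Prod.mk.eta] at ihr
      rw [ihr, hrc]
      omega
  -- convert the pyRange folds of the port to Nat-range folds
  have h0 : SInv g N M (0 * M) g := by
    refine ⟨shp_refl g, fun a b => ?_⟩
    have e : 0 * M = 0 := by omega
    rw [e, stv_zero]
  have := outer N 0 (by omega) g 0 h0
  rw [← List.range_eq_range'] at this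
  rw [func, pyRange_natCast N, pyRange_natCast M]
  rw [this]
  simp [bsum]

theorem alt_spec (g : List (List String)) (N M : Nat) :
    func_alt g (N : Int) (M : Int) = bsum g N M := by
  -- per-cell: B's two start tests are exactly "the ↘ / ↙ run starts here"
  have hcell : ∀ (i j : Nat) (c : Int),
      (if (cellG g (i : Int) (j : Int) = "B" ∨ cellG g (i : Int) (j : Int) = "G") ∧
          ((i : Int) = 0 ∨ (j : Int) = (M : Int) - 1 ∨
            ¬(cellG g ((i : Int) - 1) ((j : Int) + 1) = "B" ∨ cellG g ((i : Int) - 1) ((j : Int) + 1) = "G")) then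
        (if (cellG g (i : Int) (j : Int) = "Y" ∨ cellG g (i : Int) (j : Int) = "G") ∧
            ((i : Int) = 0 ∨ (j : Int) = 0 ∨
              ¬(cellG g ((i : Int) - 1) ((j : Int) - 1) = "Y" ∨ cellG g ((i : Int) - 1) ((j : Int) - 1) = "G")) then
          c + 1 else c) + 1
      else
        (if (cellG g (i : Int) (j : Int) = "Y" ∨ cellG g (i : Int) (j : Int) = "G") ∧
            ((i : Int) = 0 ∨ (j : Int) = 0 ∨
              ¬(cellG g ((i : Int) - 1) ((j : Int) - 1) = "Y" ∨ cellG g ((i : Int) - 1) ((j : Int) - 1) = "G")) then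
          c + 1 else c)) = c + contrib g M i j := by
    intro i j c
    have hYiff : ((cellG g (i : Int) (j : Int) = "Y" ∨ cellG g (i : Int) (j : Int) = "G") ∧
        ((i : Int) = 0 ∨ (j : Int) = 0 ∨
          ¬(cellG g ((i : Int) - 1) ((j : Int) - 1) = "Y" ∨ cellG g ((i : Int) - 1) ((j : Int) - 1) = "G")))
        ↔ (yg (oc g i j) = true ∧ sY g i j = (i, j)) := by
      rw [cellG_nat, ← yg_iff, sY_eq_self_iff]
      by_cases hi0 : i = 0
      · subst hi0; simp
      · by_cases hj0 : j = 0
        · subst hj0; simp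
        · have e1 : ((i : Int) - 1) = ((i - 1 : Nat) : Int) := by omega
          have e2 : ((j : Int) - 1) = ((j - 1 : Nat) : Int) := by omega
          rw [e1, e2, cellG_nat, ← yg_iff]
          simp [hi0, hj0]
    have hBiff : ((cellG g (i : Int) (j : Int) = "B" ∨ cellG g (i : Int) (j : Int) = "G") ∧
        ((i : Int) = 0 ∨ (j : Int) = (M : Int) - 1 ∨
          ¬(cellG g ((i : Int) - 1) ((j : Int) + 1) = "B" ∨ cellG g ((i : Int) - 1) ((j : Int) + 1) = "G")))
        ↔ (bg (oc g i j) = true ∧ sB g M i j = (i, j)) := by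
      rw [cellG_nat, ← bg_iff, sB_eq_self_iff]
      have c3 : ((j : Int) = (M : Int) - 1) ↔ j + 1 = M := by omega
      by_cases hi0 : i = 0
      · subst hi0; simp
      · have e1 : ((i : Int) - 1) = ((i - 1 : Nat) : Int) := by omega
        have e2 : ((j : Int) + 1) = ((j + 1 : Nat) : Int) := by omega
        rw [e1, e2, cellG_nat, ← bg_iff, c3]
        simp [hi0]
    by_cases h1 : yg (oc g i j) = true ∧ sY g i j = (i, j) <;>
      by_cases h2 : bg (oc g i j) = true ∧ sB g M i j = (i, j)
    · rw [if_pos (hBiff.mpr h2), if_pos (hYiff.mpr h1), contrib, if_pos h1, if_pos h2]; ring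
    · rw [if_neg (fun hh => h2 (hBiff.mp hh)), if_pos (hYiff.mpr h1), contrib, if_pos h1, if_neg h2]; ring
    · rw [if_pos (hBiff.mpr h2), if_neg (fun hh => h1 (hYiff.mp hh)), contrib, if_neg h1, if_pos h2]; ring
    · rw [if_neg (fun hh => h2 (hBiff.mp hh)), if_neg (fun hh => h1 (hYiff.mp hh)), contrib, if_neg h1, if_neg h2]; ring
  have brow : ∀ (i : Nat) (k j0 : Nat), j0 + k = M → ∀ c : Int,
      ((List.range' j0 k).map (fun j : Nat => (j : Int))).foldl
        (fun count j =>
          let v := cellG g (i : Int) j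
          let count :=
            if (v = "Y" ∨ v = "G") ∧
                ((i : Int) = 0 ∨ j = 0 ∨
                  ¬(cellG g ((i : Int) - 1) (j - 1) = "Y" ∨ cellG g ((i : Int) - 1) (j - 1) = "G")) then
              count + 1 else count
          if (v = "B" ∨ v = "G") ∧
              ((i : Int) = 0 ∨ j = (M : Int) - 1 ∨
                ¬(cellG g ((i : Int) - 1) (j + 1) = "B" ∨ cellG g ((i : Int) - 1) (j + 1) = "G")) then
            count + 1 else count) c
      = c + ((List.range' j0 k).map (fun j => contrib g M i j)).sum := by
    intro i k
    induction k with
    | zero => intro j0 hMk c; simp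
    | succ k ih =>
      intro j0 hMk c
      rw [List.range'_succ]
      simp only [List.map_cons, List.foldl_cons, List.sum_cons]
      rw [ih (j0 + 1) (by omega)]
      rw [hcell i j0 c]
      omega
  have bouter : ∀ (k i0 : Nat), i0 + k = N → ∀ c : Int,
      ((List.range' i0 k).map (fun i : Nat => (i : Int))).foldl
        (fun count i =>
          ((List.range M).map (fun j : Nat => (j : Int))).foldl
            (fun count j =>
              let v := cellG g i j
              let count :=
                if (v = "Y" ∨ v = "G") ∧
                    (i = 0 ∨ j = 0 ∨
                      ¬(cellG g (i - 1) (j - 1) = "Y" ∨ cellG g (i - 1) (j - 1) = "G")) then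
                  count + 1 else count
              if (v = "B" ∨ v = "G") ∧
                  (i = 0 ∨ j = (M : Int) - 1 ∨
                    ¬(cellG g (i - 1) (j + 1) = "B" ∨ cellG g (i - 1) (j + 1) = "G")) then
                count + 1 else count) count) c
      = c + ((List.range' i0 k).map
          (fun i => ((List.range M).map (fun j => contrib g M i j)).sum)).sum := by
    intro k
    induction k with
    | zero => intro i0 hN c; simp
    | succ k ih =>
      intro i0 hN c
      rw [List.range'_succ]
      simp only [List.map_cons, List.foldl_cons, List.sum_cons]
      rw [ih (i0 + 1) (by omega)]
      have hr := brow i0 M 0 (by omega) c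
      rw [← List.range_eq_range'] at hr
      rw [hr]
      omega
  have := bouter N 0 (by omega) 0
  rw [← List.range_eq_range'] at this
  rw [func_alt, pyRange_natCast N, pyRange_natCast M]
  rw [this]
  simp [bsum]

-- ===== VERDICT (by name: the statement is the Claim_ definition above) =====
theorem func_spec : Claim_equal_func := by
  intro grid n m hdom hpre
  unfold Spec_func
  by_cases hn : n ≤ 0
  · rw [func, func_alt, PySem.List.pyRange_one_eq_nil hn]
    rfl
  by_cases hm : m ≤ 0
  · rw [func, func_alt, PySem.List.pyRange_one_eq_nil hm]
    simp only [List.foldl_nil]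
    rw [foldl_const, foldl_const]
  · have hn' : 0 < n := by omega
    have hm' : 0 < m := by omega
    obtain ⟨hlen, hrows⟩ := hpre hn' hm'
    have hnN : n = ((n.toNat : Nat) : Int) := by omega
    have hmM : m = ((m.toNat : Nat) : Int) := by omega
    have hb : gbounds grid n.toNat m.toNat := by
      constructor
      · omega
      · intro a ha
        have haL : a < grid.length := by omega
        have hmem : grid[a] ∈ grid.take n.toNat := by
          have hlt : a < (grid.take n.toNat).length := by
            rw [List.length_take]; omega
          have hmm : (grid.take n.toNat)[a]'hlt ∈ grid.take n.toNat := List.getElem_mem hlt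
          rwa [List.getElem_take] at hmm
        have := hrows grid[a] hmem
        have hgd : grid.getD a [] = grid[a] := by
          rw [List.getD_eq_getElem?_getD, List.getElem?_eq_getElem haL]
          rfl
        rw [hgd]
        omega
    rw [hnN, hmM, grid_spec grid n.toNat m.toNat hb,
      alt_spec grid n.toNat m.toNat]
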